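-- pv_equiv track=rewrite | github.com/michael-pittman/GEUSEMAKER | geusemaker/services/userdata/generator.py | _trim_script
-- ===== SOURCE A (Python) =====
-- def _trim_script(script: str) -> str:
--     """Trim comment-only lines and collapse extra blank lines to reduce UserData size."""
--     lines = script.splitlines()
--     trimmed: list[str] = []
--     for idx, line in enumerate(lines):
--         if idx == 0 and line.startswith("#!"):
--             trimmed.append(line)
--             continue
--         stripped = line.strip()
--         if stripped == "" and (not trimmed or trimmed[-1] == ""):
--             # Skip consecutive blank lines
--             continue
--         if stripped.startswith("#"):
--             # Drop comment-only lines (keep inline comments untouched)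
--             continue
--         trimmed.append(line)
--
--     return "\n".join(trimmed).strip() + "\n"
-- ===== SOURCE B (Python) =====
-- def _trim_script(script: str) -> str:
--     """Trim comment-only lines and collapse extra blank lines to reduce UserData size."""
--     lines = script.splitlines()
--     # pass 1: drop comment-only lines (a first-line shebang is exempt)
--     code = [ln for i, ln in enumerate(lines)
--             if (i == 0 and ln.startswith("#!")) or not ln.strip().startswith("#")]
--     # pass 2: scan maximal runs; a non-blank run is kept whole, a blank run is
--     # collapsed to its first line
--     out: list[str] = []
--     i = 0
--     while i < len(code):
--         blank = code[i].strip() == ""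
--         j = i
--         while j < len(code) and (code[j].strip() == "") == blank:
--             j += 1
--         out.extend(code[i:i + 1] if blank else code[i:j])
--         i = j
--     return "\n".join(out).strip() + "\n"
-- ===== Notes on version B (the rewrite author's own statement) =====
-- stated objective: alternative
-- what changed: Replaces A's single stateful accumulator loop (which decides each line by inspecting trimmed[-1]) by two passes: a comprehension dropping comment-only lines, then a run scanner that walks maximal blank/non-blank runs with two indices, copying each non-blank run whole and collapsing each blank run to its first line.
-- intended difference: On scripts where, after comment-only lines are removed, a blank run of two or more lines starting with a whitespace-only but non-empty line is followed by a later non-blank line, A fails to collapse the run (its state test compares the last kept line literally to the empty string instead of stripping it) and keeps the extra blank lines, while B collapses every blank run to its first line, which is the blank-line collapsing the docstring asks for. — e.g. on _trim_script("a\n \n\nb"): A returns "a\n \n\nb\n", B returns "a\n \nb\n"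
import Mathlib
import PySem

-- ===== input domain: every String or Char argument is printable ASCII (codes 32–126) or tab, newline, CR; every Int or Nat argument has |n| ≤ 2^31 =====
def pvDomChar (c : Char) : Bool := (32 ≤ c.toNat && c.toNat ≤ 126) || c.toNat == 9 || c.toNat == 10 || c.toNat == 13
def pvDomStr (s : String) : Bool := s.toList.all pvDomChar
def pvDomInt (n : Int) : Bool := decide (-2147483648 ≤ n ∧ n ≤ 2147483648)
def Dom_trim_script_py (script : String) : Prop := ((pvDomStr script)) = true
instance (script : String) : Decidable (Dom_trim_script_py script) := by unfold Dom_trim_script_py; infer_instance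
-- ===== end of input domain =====

-- B replaces A's single stateful accumulator loop (which inspects trimmed[-1]) by two passes:
-- a comment filter, then a run scanner that copies each non-blank run whole and collapses each
-- blank run to its first line.  On blank runs whose first line is whitespace-only but non-empty,
-- A fails to collapse (see D_ below) and B is the fix.

-- the three line tests the Python performs, shared by both ports (and, as input parsers, by D_)
def pvSheb (l : List Char) : Bool := PySem.Chars.startswith l ['#', '!']
def pvCmt (l : List Char) : Bool := PySem.Chars.startswith (PySem.Chars.strip l) ['#']
def pvBlank (l : List Char) : Bool := PySem.Chars.strip l == []

-- ===== PORT A =====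
-- Python strings are ported at the List Char level (PySem.Str.* are thin wrappers over
-- PySem.Chars.* via toList); the loop over enumerate(lines) is the index-carrying recursion.
def pvTrimLoopA : Nat → List (List Char) → List (List Char) → List (List Char)
  | _, trimmed, [] => trimmed
  | idx, trimmed, line :: rest =>
    if decide (idx = 0) && pvSheb line then
      pvTrimLoopA (idx + 1) (trimmed ++ [line]) rest
    else if pvBlank line && (trimmed.isEmpty || (PySem.List.pyGet? trimmed (-1) == some ([] : List Char))) then
      pvTrimLoopA (idx + 1) trimmed rest
    else if pvCmt line then
      pvTrimLoopA (idx + 1) trimmed rest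
    else
      pvTrimLoopA (idx + 1) (trimmed ++ [line]) rest

def trim_script_py (script : String) : String :=
  let lines := PySem.Chars.splitlines script.toList
  let trimmed := pvTrimLoopA 0 [] lines
  String.ofList (PySem.Chars.strip (PySem.Chars.join ['\n'] trimmed) ++ ['\n'])

-- ===== PORT B =====
-- Source B pass 2 scans maximal runs with an inner while loop: the inner 'while j' scan is the
-- takeWhile of the run's class, the slice code[i:j] is that takeWhile, and the outer loop
-- resumes at j, i.e. on the dropWhile — a step-for-step port of the index-based scan.
def pvCollapseF : Nat → List (List Char) → List (List Char)
  | _, [] => []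
  | 0, _ :: _ => []
  | fuel + 1, x :: xs =>
    (if pvBlank x then [x] else x :: xs.takeWhile (fun y => pvBlank y == pvBlank x)) ++
      pvCollapseF fuel (xs.dropWhile (fun y => pvBlank y == pvBlank x))

def pvCollapse (code : List (List Char)) : List (List Char) := pvCollapseF code.length code

def trim_script_py_alt (script : String) : String :=
  let lines := PySem.Chars.splitlines script.toList
  let code := ((PySem.List.enumerate lines).filter (fun p =>
      (p.1 == 0 && pvSheb p.2) || ! pvCmt p.2)).map Prod.snd
  String.ofList (PySem.Chars.strip (PySem.Chars.join ['\n'] (pvCollapse code)) ++ ['\n'])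

-- ===== PRECONDITION & SPEC =====
-- On scripts where, after comment-only lines are removed (first-line shebang exempt), some blank
-- run of length ≥ 2 starting with a whitespace-only but non-empty line sits before a later
-- non-blank line, A fails to collapse the run (its state test compares the last kept line
-- literally to "" instead of stripping it) and keeps the extra blank lines, while B collapses
-- every blank run to its first line — the blank-line collapsing the docstring asks for.  D_ classifies each surviving line as 0 (empty), 1 (whitespace-only) or 2 (non-blank)
-- and, after discarding the trailing blanks the final strip() erases, asks for the pattern
-- 'non-blank, whitespace-only, blank' ([c,1,2] in the reversed signature).
def pvCls (l : List Char) : Nat := if pvBlank l then l.length.min 1 else 2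
def pvSig (s : String) : List Nat :=
  (if pvSheb ((PySem.Chars.splitlines s.toList).headD []) then [2] else []) ++
  (PySem.Chars.splitlines s.toList).filterMap fun l => if pvCmt l then none else some (pvCls l)
def D_trim_script_py (s : String) : Prop :=
  ∃ c ≤ 1, [c, 1, 2] <:+: (pvSig s).reverse.dropWhile (· ≤ 1)
instance (script : String) : Decidable (D_trim_script_py script) := by
  unfold D_trim_script_py; infer_instance

def Spec_trim_script_py (script : String) (out : String) : Prop :=
  ¬ D_trim_script_py script → out = trim_script_py_alt script
instance (script : String) (out : String) : Decidable (Spec_trim_script_py script out) := by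
  unfold Spec_trim_script_py; infer_instance

def pvDiffWitness_trim_script_py : String := "a\n \n\nb"
def pvDiffWitnessOut_trim_script_py : String × String := ("a\n \n\nb\n", "a\n \nb\n")

-- ===== CLAIM (what is proved, stated in full; the proofs are below) =====
def Claim_unchanged_trim_script_py : Prop :=
  ∀ (script : String), Dom_trim_script_py script → Spec_trim_script_py script (trim_script_py script)
def Claim_changed_trim_script_py : Prop :=
  Dom_trim_script_py (pvDiffWitness_trim_script_py) ∧ D_trim_script_py (pvDiffWitness_trim_script_py) ∧
  trim_script_py (pvDiffWitness_trim_script_py) = pvDiffWitnessOut_trim_script_py.1 ∧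
  trim_script_py_alt (pvDiffWitness_trim_script_py) = pvDiffWitnessOut_trim_script_py.2 ∧
  pvDiffWitnessOut_trim_script_py.1 ≠ pvDiffWitnessOut_trim_script_py.2
def Claim_exact_trim_script_py : Prop :=
  ∀ (script : String), Dom_trim_script_py script → D_trim_script_py script →
    trim_script_py script ≠ trim_script_py_alt script

-- ===== LEMMAS AND PROOFS =====

-- A's blank-collapse step, extracted: state b = "trimmed is empty or its last line is ''"
def pvG : Bool → List (List Char) → List (List Char)
  | _, [] => []
  | b, x :: xs => if pvBlank x && b then pvG b xs else x :: pvG (x == []) xs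

-- B's blank-collapse step: state b = "the previous surviving line is blank"
def pvH : Bool → List (List Char) → List (List Char)
  | _, [] => []
  | b, x :: xs => if pvBlank x && b then pvH b xs else x :: pvH (pvBlank x) xs

-- A's loop state as a Bool
def pvSt (trimmed : List (List Char)) : Bool :=
  trimmed.isEmpty || (PySem.List.pyGet? trimmed (-1) == some ([] : List Char))

-- drop trailing blank lines
def pvCoreB (L : List (List Char)) : List (List Char) := (L.reverse.dropWhile pvBlank).reverse

-- proof-side view of the comment filter
def pvKeepTail (l : List Char) : Bool := ! pvCmt l
def pvKeepHead (l : List Char) : Bool := pvSheb l || ! pvCmt l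
def pvFilterLines : List (List Char) → List (List Char)
  | [] => []
  | l :: ls => (if pvKeepHead l then [l] else []) ++ ls.filter pvKeepTail

-- index form of the difference region on an arbitrary (already filtered) line list
def pvW (L : List (List Char)) (i : Nat) : Bool :=
  pvBlank (L.getD i []) && ! (L.getD i [] == []) &&
  decide (i + 1 < L.length) && pvBlank (L.getD (i + 1) []) &&
  (List.range L.length).any (fun k => decide (i + 1 < k) && ! pvBlank (L.getD k []))

def pvDq (L : List (List Char)) : Bool :=
  (List.range L.length).any (fun i => decide (1 ≤ i) && ! pvBlank (L.getD (i - 1) []) && pvW L i)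

theorem rstrip_eq_nil_iff (l : List Char) :
    PySem.Chars.rstrip l = [] ↔ ∀ c ∈ l, PySem.Chars.isspace c = true := by
  simp [PySem.Chars.rstrip, List.dropWhile_eq_nil_iff]

theorem pvBlank_iff (l : List Char) :
    pvBlank l = true ↔ ∀ c ∈ l, PySem.Chars.isspace c = true := by
  simp only [pvBlank, beq_iff_eq, PySem.Chars.strip, PySem.Chars.lstrip, rstrip_eq_nil_iff]
  constructor
  · intro h c hc
    have := List.takeWhile_append_dropWhile (p := PySem.Chars.isspace) (l := l)
    have hc' : c ∈ List.takeWhile PySem.Chars.isspace l ++ List.dropWhile PySem.Chars.isspace l := by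
      rw [this]; exact hc
    rcases List.mem_append.1 hc' with h1 | h2
    · exact List.mem_takeWhile_imp h1
    · exact h _ h2
  · intro h c hc
    exact h c ((List.dropWhile_sublist _).mem hc)

theorem pvBlank_nil : pvBlank [] = true := by decide

theorem pvBeq_nil_false (x : List Char) (hb : pvBlank x = false) : (x == []) = false := by
  cases x with
  | nil => exact absurd pvBlank_nil (by simp [hb])
  | cons c cs => simp

theorem pvBlank_of_startswith_hash (l : List Char) (t : List Char)
    (h : PySem.Chars.startswith l ('#' :: t) = true) : pvBlank l = false := by
  rcases (List.isPrefixOf_iff_prefix).1 h with ⟨r, hr⟩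
  by_contra hb
  have hb' : pvBlank l = true := by revert hb; cases pvBlank l <;> simp
  have := (pvBlank_iff l).1 hb' '#' (by rw [← hr]; simp)
  simp [PySem.Chars.isspace] at this

theorem pvSt_append (trimmed : List (List Char)) (a : List Char) :
    pvSt (trimmed ++ [a]) = (a == []) := by
  simp [pvSt]

theorem pvCmt_of_blank (l : List Char) (h : pvBlank l = true) : pvCmt l = false := by
  have hstr : PySem.Chars.strip l = [] := by simpa [pvBlank] using h
  simp [pvCmt, hstr, PySem.Chars.startswith]

theorem pvLoopA_tail (ls : List (List Char)) (idx : Nat) (trimmed : List (List Char)) :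
    pvTrimLoopA (idx + 1) trimmed ls = trimmed ++ pvG (pvSt trimmed) (ls.filter pvKeepTail) := by
  induction ls generalizing idx trimmed with
  | nil => simp [pvTrimLoopA, pvG]
  | cons line rest ih =>
    rw [pvTrimLoopA, if_neg (by simp)]
    by_cases hblank : pvBlank line = true
    · have hkeep : pvKeepTail line = true := by simp [pvKeepTail, pvCmt_of_blank line hblank]
      by_cases hst : pvSt trimmed = true
      · rw [if_pos (by simp [hblank]; simpa [pvSt] using hst)]
        rw [ih (idx+1) trimmed, List.filter_cons_of_pos hkeep, pvG, if_pos (by simp [hblank, hst])]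
      · have hst' : pvSt trimmed = false := by revert hst; cases pvSt trimmed <;> simp
        rw [if_neg (by simp [pvSt] at hst'; simp [hst'])]
        rw [if_neg (by simp [pvCmt_of_blank line hblank])]
        rw [ih (idx+1) (trimmed ++ [line]), pvSt_append,
            List.filter_cons_of_pos hkeep, pvG, if_neg (by simp [hblank, hst']),
            List.append_assoc, List.singleton_append]
    · have hblank' : pvBlank line = false := by revert hblank; cases pvBlank line <;> simp
      rw [if_neg (by simp [hblank'])]
      by_cases hcom : pvCmt line = true
      · rw [if_pos hcom, ih (idx+1) trimmed, List.filter_cons_of_neg (by simp [pvKeepTail, hcom])]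
      · have hcom' : pvCmt line = false := by revert hcom; cases pvCmt line <;> simp
        rw [if_neg (by simp [hcom']), ih (idx+1) (trimmed ++ [line]), pvSt_append,
            List.filter_cons_of_pos (by simp [pvKeepTail, hcom']),
            pvG, if_neg (by simp [hblank']),
            List.append_assoc, List.singleton_append]

theorem pvLoopA_eq (lines : List (List Char)) :
    pvTrimLoopA 0 [] lines = pvG true (pvFilterLines lines) := by
  cases lines with
  | nil => simp [pvTrimLoopA, pvFilterLines, pvG]
  | cons l ls =>
    rw [pvTrimLoopA]
    by_cases hsb : pvSheb l = true
    · rw [if_pos (by simp [hsb])]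
      rw [show ([] ++ [l] : List (List Char)) = [l] from by simp]
      rw [pvLoopA_tail ls 0 [l]]
      have hb : pvBlank l = false := pvBlank_of_startswith_hash l ['!'] (by simpa [pvSheb] using hsb)
      have hknil : pvSt [l] = (l == []) := by simpa using pvSt_append [] l
      rw [hknil]
      simp only [pvFilterLines, pvKeepHead, hsb, Bool.true_or, if_pos, List.singleton_append]
      rw [pvG, if_neg (by simp [hb])]
    · have hsb' : pvSheb l = false := by revert hsb; cases pvSheb l <;> simp
      rw [if_neg (by simp [hsb'])]
      by_cases hblank : pvBlank l = true
      · have hkeep : pvKeepTail l = true := by simp [pvKeepTail, pvCmt_of_blank l hblank]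
        rw [if_pos (by simp [hblank])]
        rw [pvLoopA_tail ls 0 []]
        rw [show pvSt [] = true from by simp [pvSt]]
        simp only [pvFilterLines, pvKeepHead, hsb', Bool.false_or, List.nil_append]
        rw [show (if (! pvCmt l) = true then [l] else ([] : List (List Char))) = [l] from by
              simp [pvCmt_of_blank l hblank]]
        rw [List.singleton_append, pvG, if_pos (by simp [hblank])]
      · have hblank' : pvBlank l = false := by revert hblank; cases pvBlank l <;> simp
        rw [if_neg (by simp [hblank'])]
        by_cases hcom : pvCmt l = true
        · rw [if_pos hcom, pvLoopA_tail ls 0 []]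
          rw [show pvSt [] = true from by simp [pvSt]]
          simp only [pvFilterLines, pvKeepHead, hsb', Bool.false_or, List.nil_append,
            show (! pvCmt l) = false from by simp [hcom]]
          simp
        · have hcom' : pvCmt l = false := by revert hcom; cases pvCmt l <;> simp
          rw [if_neg (by simp [hcom']), show ([] ++ [l] : List (List Char)) = [l] from by simp,
            pvLoopA_tail ls 0 [l]]
          have hknil : pvSt [l] = (l == []) := by simpa using pvSt_append [] l
          rw [hknil]
          simp only [pvFilterLines, pvKeepHead, hsb', Bool.false_or, hcom', Bool.not_false,
            if_pos, List.singleton_append]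
          rw [pvG, if_neg (by simp [hblank'])]

theorem pvEnum_tail (ls : List (List Char)) (k : Int) (hk : 1 ≤ k) :
    ((PySem.List.enumerate ls k).filter (fun p =>
        (p.1 == 0 && pvSheb p.2) || ! pvCmt p.2)).map Prod.snd =
      ls.filter pvKeepTail := by
  induction ls generalizing k with
  | nil => simp [PySem.List.enumerate]
  | cons l ls ih =>
    rw [PySem.List.enumerate]
    have hk0 : (k == (0:Int)) = false := by simp; omega
    rw [List.filter_cons]
    simp only [hk0, Bool.false_and, Bool.false_or]
    by_cases hc : pvKeepTail l = true
    · rw [if_pos (by simpa [pvKeepTail] using hc), List.map_cons, ih (k+1) (by omega),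
        List.filter_cons_of_pos hc]
    · have hc' : pvKeepTail l = false := by revert hc; cases pvKeepTail l <;> simp
      rw [if_neg (by simp [pvKeepTail] at hc' ⊢; simpa using hc'), ih (k+1) (by omega),
        List.filter_cons_of_neg (by simp [hc'])]

theorem pvCode_eq (lines : List (List Char)) :
    ((PySem.List.enumerate lines).filter (fun p =>
        (p.1 == 0 && pvSheb p.2) || ! pvCmt p.2)).map Prod.snd =
      pvFilterLines lines := by
  cases lines with
  | nil => simp [PySem.List.enumerate, pvFilterLines]
  | cons l ls =>
    rw [PySem.List.enumerate, List.filter_cons]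
    simp only [pvFilterLines]
    by_cases hh : pvKeepHead l = true
    · rw [if_pos (by simpa [pvKeepHead] using hh), List.map_cons, pvEnum_tail ls (0 + 1) (by omega),
        show (if pvKeepHead l then [l] else []) = [l] from by simp [hh]]
      simp
    · have hh' : pvKeepHead l = false := by revert hh; cases pvKeepHead l <;> simp
      rw [if_neg (by simp [pvKeepHead] at hh' ⊢; simp [hh'.1, hh'.2]), pvEnum_tail ls (0 + 1) (by omega),
        show (if pvKeepHead l then [l] else ([] : List (List Char))) = [] from by simp [hh']]
      simp

-- ===== B's run scanner equals the state machine pvH false =====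

theorem pvDropWhile_head_false {α : Type} (p : α → Bool) (l : List α) (y : α) (t : List α)
    (h : l.dropWhile p = y :: t) : p y = false := by
  induction l with
  | nil => simp [List.dropWhile] at h
  | cons a as ih =>
    by_cases hp : p a = true
    · rw [List.dropWhile_cons_of_pos hp] at h; exact ih h
    · have hp' : p a = false := by revert hp; cases p a <;> simp
      rw [List.dropWhile_cons_of_neg (by simp [hp'])] at h
      cases h
      exact hp'

theorem pvH_true_eq_false (t : List (List Char))
    (h : ∀ y s, t = y :: s → pvBlank y = false) : pvH true t = pvH false t := by
  cases t with
  | nil => rfl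
  | cons y s =>
    have hy : pvBlank y = false := h y s rfl
    rw [pvH, pvH, if_neg (by simp [hy]), if_neg (by simp [hy])]

theorem pvH_blank_prefix (r t : List (List Char)) (h : ∀ y ∈ r, pvBlank y = true) :
    pvH true (r ++ t) = pvH true t := by
  induction r with
  | nil => rfl
  | cons a as ih =>
    rw [List.cons_append, pvH, if_pos (by simp [h a List.mem_cons_self])]
    exact ih (fun y hy => h y (List.mem_cons_of_mem _ hy))

theorem pvH_nonblank_prefix (r t : List (List Char)) (h : ∀ y ∈ r, pvBlank y = false) :
    pvH false (r ++ t) = r ++ pvH false t := by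
  induction r with
  | nil => rfl
  | cons a as ih =>
    have ha : pvBlank a = false := h a List.mem_cons_self
    rw [List.cons_append, pvH, if_neg (by simp [ha]), ha,
      ih (fun y hy => h y (List.mem_cons_of_mem _ hy)), List.cons_append]

theorem pvCollapse_eq_aux (n : Nat) : ∀ L : List (List Char), L.length ≤ n →
    pvCollapseF n L = pvH false L := by
  induction n with
  | zero =>
    intro L hL
    have : L = [] := List.length_eq_zero_iff.1 (Nat.le_zero.1 hL)
    subst this; simp [pvCollapseF, pvH]
  | succ n ih =>
    intro L hL
    cases L with
    | nil => simp [pvCollapseF, pvH]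
    | cons x xs =>
      by_cases hb : pvBlank x = true
      · have hfun : (fun y => pvBlank y == pvBlank x) = pvBlank := by
          funext y; rw [hb]; cases pvBlank y <;> rfl
        have hlen : (xs.dropWhile pvBlank).length ≤ n := by
          have := List.length_dropWhile_le pvBlank xs
          simp at hL; omega
        have hrhs : pvH false (x :: xs) = x :: pvH true xs := by
          rw [pvH]; simp [hb]
        rw [pvCollapseF, hfun, if_pos hb, ih _ hlen, hrhs]
        have hsplit := List.takeWhile_append_dropWhile (p := pvBlank) (l := xs)
        conv_rhs => rw [← hsplit]
        rw [pvH_blank_prefix _ _ (fun y hy => List.mem_takeWhile_imp hy)]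
        rw [pvH_true_eq_false _ (fun y s hys => pvDropWhile_head_false pvBlank xs y s hys)]
        simp
      · have hb' : pvBlank x = false := by revert hb; cases pvBlank x <;> simp
        have hfun : (fun y => pvBlank y == pvBlank x) = (fun y => ! pvBlank y) := by
          funext y; rw [hb']; cases pvBlank y <;> rfl
        have hlen : (xs.dropWhile (fun y => ! pvBlank y)).length ≤ n := by
          have := List.length_dropWhile_le (fun y => ! pvBlank y) xs
          simp at hL; omega
        have hrhs : pvH false (x :: xs) = x :: pvH false xs := by
          rw [pvH]; simp [hb']
        rw [pvCollapseF, hfun, if_neg (by simp [hb']), ih _ hlen, hrhs]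
        have hsplit := List.takeWhile_append_dropWhile (p := fun y => ! pvBlank y) (l := xs)
        conv_rhs => rw [← hsplit]
        rw [pvH_nonblank_prefix _ _ (fun y hy => by
          have := List.mem_takeWhile_imp hy
          revert this; cases pvBlank y <;> simp)]
        simp

theorem pvCollapse_eq (L : List (List Char)) : pvCollapse L = pvH false L :=
  pvCollapse_eq_aux L.length L le_rfl

-- ===== the main unchanged-region argument: pvG true vs pvH true up to trailing blanks =====

theorem pvW_iff (L : List (List Char)) (i : Nat) :
    pvW L i = true ↔
      pvBlank (L.getD i []) = true ∧ L.getD i [] ≠ [] ∧ i + 1 < L.length ∧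
      pvBlank (L.getD (i + 1) []) = true ∧ ∃ k < L.length, i + 1 < k ∧ pvBlank (L.getD k []) = false := by
  simp [pvW, List.any_eq_true, List.mem_range, and_assoc]

theorem pvDq_iff (L : List (List Char)) :
    pvDq L = true ↔ ∃ i < L.length, 1 ≤ i ∧ pvBlank (L.getD (i - 1) []) = false ∧ pvW L i = true := by
  simp [pvDq, List.any_eq_true, List.mem_range, and_assoc]

theorem pvW_shift (xs : List (List Char)) (x : List Char) (i : Nat)
    (h : pvW xs i = true) : pvW (x :: xs) (i + 1) = true := by
  rw [pvW_iff] at h ⊢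
  obtain ⟨h1, h2, h3, h4, k, hk, hik, hbk⟩ := h
  refine ⟨by simpa using h1, by simpa using h2, by simp; omega, by simpa using h4, k + 1, by simp; omega, by omega, by simpa using hbk⟩

theorem pvDq_cons (xs : List (List Char)) (x : List Char)
    (h : pvDq xs = true) : pvDq (x :: xs) = true := by
  rw [pvDq_iff] at h ⊢
  obtain ⟨i, hi, h1i, hprev, hw⟩ := h
  refine ⟨i + 1, by simp; omega, by omega, ?_, pvW_shift _ _ _ hw⟩
  have : i + 1 - 1 = (i - 1) + 1 := by omega
  rw [this]
  simpa using hprev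

theorem pvDp_cons (xs : List (List Char)) (x : List Char) (hx : pvBlank x = false)
    (h : pvW xs 0 = true ∨ pvDq xs = true) : pvDq (x :: xs) = true := by
  rcases h with h | h
  · rw [pvDq_iff]
    exact ⟨1, by rw [pvW_iff] at h; simp; omega, by omega, by simpa using hx, pvW_shift _ _ _ h⟩
  · exact pvDq_cons _ _ h

theorem pvCoreB_cons (x : List Char) (A : List (List Char)) :
    pvCoreB (x :: A) = if pvCoreB A = [] then pvCoreB [x] else x :: pvCoreB A := by
  simp only [pvCoreB, List.reverse_cons, List.dropWhile_append]
  by_cases h : (A.reverse.dropWhile pvBlank).isEmpty = true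
  · rw [if_pos h, if_pos (by simpa [List.isEmpty_iff] using h)]
    simp
  · have h' : ¬ ((A.reverse.dropWhile pvBlank).isEmpty = true) := h
    rw [if_neg h', if_neg (by simp [List.isEmpty_iff] at h'; simp [h'])]
    simp

theorem pvCoreB_nil_iff (A : List (List Char)) :
    pvCoreB A = [] ↔ ∀ a ∈ A, pvBlank a = true := by
  simp [pvCoreB, List.dropWhile_eq_nil_iff]

theorem pvCoreB_congr (x : List Char) (A B : List (List Char)) (h : pvCoreB A = pvCoreB B) :
    pvCoreB (x :: A) = pvCoreB (x :: B) := by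
  rw [pvCoreB_cons x A, h, ← pvCoreB_cons x B]

theorem pvG_subset (b : Bool) (xs : List (List Char)) : ∀ z ∈ pvG b xs, z ∈ xs := by
  induction xs generalizing b with
  | nil => simp [pvG]
  | cons x xs ih =>
    intro z hz
    rw [pvG] at hz
    by_cases h : (pvBlank x && b) = true
    · rw [if_pos h] at hz; exact List.mem_cons_of_mem _ (ih b z hz)
    · rw [if_neg h] at hz
      rcases List.mem_cons.1 hz with h1 | h1
      · simp [h1]
      · exact List.mem_cons_of_mem _ (ih _ z h1)

theorem pvH_subset (b : Bool) (xs : List (List Char)) : ∀ z ∈ pvH b xs, z ∈ xs := by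
  induction xs generalizing b with
  | nil => simp [pvH]
  | cons x xs ih =>
    intro z hz
    rw [pvH] at hz
    by_cases h : (pvBlank x && b) = true
    · rw [if_pos h] at hz; exact List.mem_cons_of_mem _ (ih b z hz)
    · rw [if_neg h] at hz
      rcases List.mem_cons.1 hz with h1 | h1
      · simp [h1]
      · exact List.mem_cons_of_mem _ (ih _ z h1)

theorem pvMain (n : Nat) : ∀ xs : List (List Char), xs.length ≤ n →
    ((pvW xs 0 || pvDq xs) = false → pvCoreB (pvG false xs) = pvCoreB (pvH false xs)) ∧
    (pvDq xs = false → pvCoreB (pvG true xs) = pvCoreB (pvH true xs)) := by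
  induction n with
  | zero =>
    intro xs hlen
    have : xs = [] := List.length_eq_zero_iff.1 (Nat.le_zero.1 hlen)
    subst this
    exact ⟨fun _ => rfl, fun _ => rfl⟩
  | succ n ih =>
    intro xs hlen
    cases xs with
    | nil => exact ⟨fun _ => rfl, fun _ => rfl⟩
    | cons x xs =>
      have hlen' : xs.length ≤ n := by simpa using hlen
      constructor
      · -- false mode
        intro hD
        have hDq : pvDq (x :: xs) = false := by
          revert hD; cases pvDq (x :: xs) <;> simp
        have hW : pvW (x :: xs) 0 = false := by
          revert hD; cases pvW (x :: xs) 0 <;> simp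
        by_cases hb : pvBlank x = true
        · by_cases hx : x = []
          · subst hx
            rw [pvG, if_neg (by simp), pvH, if_neg (by simp)]
            have hDq' : pvDq xs = false := by
              by_contra hc
              have : pvDq xs = true := by revert hc; cases pvDq xs <;> simp
              rw [pvDq_cons xs [] this] at hDq; exact absurd hDq (by simp)
            exact pvCoreB_congr _ _ _ ((ih xs hlen').2 hDq')
          · -- x blank, nonempty
            have hxb : (x == []) = false := by simp [hx]
            cases xs with
            | nil => rfl
            | cons y ys =>
              by_cases hy : pvBlank y = true
              · -- everything from here on must be blank
                have hall : ∀ z ∈ ys, pvBlank z = true := by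
                  intro z hz
                  by_contra hc
                  have hzb : pvBlank z = false := by revert hc; cases pvBlank z <;> simp
                  obtain ⟨j, hj, hje⟩ := List.mem_iff_getElem.1 hz
                  have : pvW (x :: y :: ys) 0 = true := by
                    rw [pvW_iff]
                    refine ⟨by simpa using hb, by simpa using hx, by simp, by simpa using hy,
                      j + 2, by simp; omega, by omega, ?_⟩
                    have : (x :: y :: ys).getD (j + 2) [] = ys.getD j [] := rfl
                    rw [this, List.getD_eq_getElem _ _ hj, hje]
                    exact hzb
                  rw [this] at hW; exact absurd hW (by simp)
                have hallG : ∀ z ∈ pvG false (x :: y :: ys), pvBlank z = true := by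
                  intro z hz
                  rcases List.mem_cons.1 (pvG_subset _ _ z hz) with h1 | h1
                  · subst h1; exact hb
                  · rcases List.mem_cons.1 h1 with h2 | h2
                    · subst h2; exact hy
                    · exact hall z h2
                have hallH : ∀ z ∈ pvH false (x :: y :: ys), pvBlank z = true := by
                  intro z hz
                  rcases List.mem_cons.1 (pvH_subset _ _ z hz) with h1 | h1
                  · subst h1; exact hb
                  · rcases List.mem_cons.1 h1 with h2 | h2
                    · subst h2; exact hy
                    · exact hall z h2
                rw [(pvCoreB_nil_iff _).2 hallG, (pvCoreB_nil_iff _).2 hallH]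
              · -- y nonblank
                have hy' : pvBlank y = false := by revert hy; cases pvBlank y <;> simp
                rw [pvG, if_neg (by simp), pvG, if_neg (by simp [hy']), pvH, if_neg (by simp),
                  pvH, if_neg (by simp [hy']), pvBeq_nil_false y hy', hy']
                have hDp : (pvW ys 0 || pvDq ys) = false := by
                  by_contra hc
                  have h1 : (pvW ys 0 || pvDq ys) = true := by
                    revert hc; cases (pvW ys 0 || pvDq ys) <;> simp
                  have h2 : pvDq (y :: ys) = true := pvDp_cons ys y hy' (by simpa using h1)
                  have h3 : pvDq (x :: y :: ys) = true := pvDq_cons _ _ h2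
                  rw [h3] at hDq; exact absurd hDq (by simp)
                have := (ih ys (by simp at hlen'; omega)).1 hDp
                exact pvCoreB_congr _ _ _ (pvCoreB_congr _ _ _ this)
        · -- x nonblank
          have hb' : pvBlank x = false := by revert hb; cases pvBlank x <;> simp
          rw [pvG, if_neg (by simp [hb']), pvH, if_neg (by simp [hb']), pvBeq_nil_false x hb', hb']
          have hDp : (pvW xs 0 || pvDq xs) = false := by
            by_contra hc
            have h1 : (pvW xs 0 || pvDq xs) = true := by
              revert hc; cases (pvW xs 0 || pvDq xs) <;> simp
            have h2 : pvDq (x :: xs) = true := pvDp_cons xs x hb' (by simpa using h1)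
            rw [h2] at hDq; exact absurd hDq (by simp)
          exact pvCoreB_congr _ _ _ ((ih xs hlen').1 hDp)
      · -- true mode
        intro hDq
        by_cases hb : pvBlank x = true
        · rw [pvG, if_pos (by simp [hb]), pvH, if_pos (by simp [hb])]
          have hDq' : pvDq xs = false := by
            by_contra hc
            have : pvDq xs = true := by revert hc; cases pvDq xs <;> simp
            rw [pvDq_cons xs x this] at hDq; exact absurd hDq (by simp)
          exact (ih xs hlen').2 hDq'
        · have hb' : pvBlank x = false := by revert hb; cases pvBlank x <;> simp
          rw [pvG, if_neg (by simp [hb']), pvH, if_neg (by simp [hb']), pvBeq_nil_false x hb', hb']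
          have hDp : (pvW xs 0 || pvDq xs) = false := by
            by_contra hc
            have h1 : (pvW xs 0 || pvDq xs) = true := by
              revert hc; cases (pvW xs 0 || pvDq xs) <;> simp
            have h2 : pvDq (x :: xs) = true := pvDp_cons xs x hb' (by simpa using h1)
            rw [h2] at hDq; exact absurd hDq (by simp)
          exact pvCoreB_congr _ _ _ ((ih xs hlen').1 hDp)

-- ===== strip∘join invariances =====

theorem pvRstrip_append (u v : List Char) (hv : ∀ c ∈ v, PySem.Chars.isspace c = true) :
    PySem.Chars.rstrip (u ++ v) = PySem.Chars.rstrip u := by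
  simp only [PySem.Chars.rstrip, List.reverse_append, List.dropWhile_append]
  rw [show (v.reverse.dropWhile PySem.Chars.isspace) = [] from
    List.dropWhile_eq_nil_iff.2 (by simpa using hv)]
  simp

theorem pvStrip_append_space (u v : List Char) (hv : ∀ c ∈ v, PySem.Chars.isspace c = true) :
    PySem.Chars.strip (u ++ v) = PySem.Chars.strip u := by
  simp only [PySem.Chars.strip, PySem.Chars.lstrip, List.dropWhile_append]
  by_cases h : (u.dropWhile PySem.Chars.isspace).isEmpty = true
  · rw [if_pos h]
    rw [show (v.dropWhile PySem.Chars.isspace) = [] from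
      List.dropWhile_eq_nil_iff.2 (by simpa using hv)]
    rw [show (u.dropWhile PySem.Chars.isspace) = [] from by simpa [List.isEmpty_iff] using h]
  · rw [if_neg h, pvRstrip_append _ _ hv]

theorem pvStrip_prepend_space (u v : List Char) (hu : ∀ c ∈ u, PySem.Chars.isspace c = true) :
    PySem.Chars.strip (u ++ v) = PySem.Chars.strip v := by
  simp only [PySem.Chars.strip, PySem.Chars.lstrip, List.dropWhile_append]
  rw [show (u.dropWhile PySem.Chars.isspace) = [] from
    List.dropWhile_eq_nil_iff.2 (by simpa using hu)]
  simp

theorem pvJoin_append_single (m : List (List Char)) (b : List Char) (hm : m ≠ []) :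
    PySem.Chars.join ['\n'] (m ++ [b]) = PySem.Chars.join ['\n'] m ++ '\n' :: b := by
  induction m with
  | nil => exact absurd rfl hm
  | cons a m ih =>
    cases m with
    | nil => simp [PySem.Chars.join, List.intercalate, List.intersperse]
    | cons c m' =>
      have ih' := ih (by simp)
      simp only [PySem.Chars.join, List.intercalate] at ih' ⊢
      simp only [List.cons_append] at ih' ⊢
      rw [List.intersperse_cons₂, List.intersperse_cons₂,
        List.flatten_cons, List.flatten_cons, List.flatten_cons, List.flatten_cons, ih']
      simp [List.append_assoc]

theorem pvJoin_cons (x : List Char) (m : List (List Char)) (hm : m ≠ []) :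
    PySem.Chars.join ['\n'] (x :: m) = x ++ '\n' :: PySem.Chars.join ['\n'] m := by
  cases m with
  | nil => exact absurd rfl hm
  | cons c m' =>
    simp only [PySem.Chars.join, List.intercalate]
    rw [List.intersperse_cons₂, List.flatten_cons, List.flatten_cons]
    simp

theorem pvStrip_join_append_single_blank (m : List (List Char)) (b : List Char)
    (hb : pvBlank b = true) :
    PySem.Chars.strip (PySem.Chars.join ['\n'] (m ++ [b])) =
      PySem.Chars.strip (PySem.Chars.join ['\n'] m) := by
  cases m with
  | nil =>
    simp [PySem.Chars.join, List.intercalate, List.intersperse]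
    simpa [pvBlank] using hb
  | cons a m' =>
    rw [pvJoin_append_single _ _ (by simp)]
    exact pvStrip_append_space _ _ (by
      intro c hc
      rcases List.mem_cons.1 hc with h | h
      · subst h; decide
      · exact (pvBlank_iff b).1 hb c h)

theorem pvStrip_join_cons_blank (x : List Char) (m : List (List Char))
    (hx : pvBlank x = true) :
    PySem.Chars.strip (PySem.Chars.join ['\n'] (x :: m)) =
      PySem.Chars.strip (PySem.Chars.join ['\n'] m) := by
  cases m with
  | nil =>
    simp [PySem.Chars.join, List.intercalate, List.intersperse]
    simpa [pvBlank] using hx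
  | cons c m' =>
    rw [pvJoin_cons _ _ (by simp)]
    rw [show x ++ '\n' :: PySem.Chars.join ['\n'] (c :: m') =
      (x ++ ['\n']) ++ PySem.Chars.join ['\n'] (c :: m') from by simp]
    exact pvStrip_prepend_space _ _ (by
      intro d hd
      rcases List.mem_append.1 hd with h | h
      · exact (pvBlank_iff x).1 hx d h
      · simp at h; subst h; decide)

theorem pvStrip_join_append_blank (m t : List (List Char)) (ht : ∀ a ∈ t, pvBlank a = true) :
    PySem.Chars.strip (PySem.Chars.join ['\n'] (m ++ t)) =
      PySem.Chars.strip (PySem.Chars.join ['\n'] m) := by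
  induction t generalizing m with
  | nil => simp
  | cons b t' ih =>
    rw [show m ++ (b :: t') = (m ++ [b]) ++ t' from by simp]
    rw [ih (m ++ [b]) (fun a ha => ht a (List.mem_cons_of_mem _ ha))]
    exact pvStrip_join_append_single_blank m b (ht b (List.mem_cons_self))

theorem pvStrip_join_coreB (l : List (List Char)) :
    PySem.Chars.strip (PySem.Chars.join ['\n'] l) =
      PySem.Chars.strip (PySem.Chars.join ['\n'] (pvCoreB l)) := by
  have hdec : l = pvCoreB l ++ (l.reverse.takeWhile pvBlank).reverse := by
    have h1 : l.reverse = l.reverse.takeWhile pvBlank ++ l.reverse.dropWhile pvBlank :=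
      (List.takeWhile_append_dropWhile).symm
    calc l = l.reverse.reverse := by simp
    _ = (l.reverse.takeWhile pvBlank ++ l.reverse.dropWhile pvBlank).reverse := by rw [← h1]
    _ = pvCoreB l ++ (l.reverse.takeWhile pvBlank).reverse := by
        rw [List.reverse_append]; rfl
  conv_lhs => rw [hdec]
  exact pvStrip_join_append_blank _ _ (by
    intro a ha
    exact List.mem_takeWhile_imp (List.mem_reverse.1 ha))

theorem pvStrip_join_H_false_true (L : List (List Char)) :
    PySem.Chars.strip (PySem.Chars.join ['\n'] (pvH false L)) =
      PySem.Chars.strip (PySem.Chars.join ['\n'] (pvH true L)) := by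
  cases L with
  | nil => rfl
  | cons x xs =>
    by_cases hb : pvBlank x = true
    · rw [pvH, if_neg (by simp), pvH, if_pos (by simp [hb]), hb]
      exact pvStrip_join_cons_blank _ _ hb
    · have hb' : pvBlank x = false := by revert hb; cases pvBlank x <;> simp
      rw [pvH, if_neg (by simp [hb']), pvH, if_neg (by simp [hb'])]

-- ===== the bridge from D_'s signature view to the filtered lines =====

theorem pvFilterMap_eq (ls : List (List Char)) :
    (ls.filterMap fun l => if pvCmt l then none else some (pvCls l)) =
      (ls.filter pvKeepTail).map pvCls := by
  induction ls with
  | nil => rfl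
  | cons l ls ih =>
    by_cases hc : pvCmt l = true
    · rw [List.filterMap_cons, if_pos hc, List.filter_cons_of_neg (by simp [pvKeepTail, hc]), ih]
    · have hc' : pvCmt l = false := by revert hc; cases pvCmt l <;> simp
      rw [List.filterMap_cons, if_neg (by simp [hc']),
        List.filter_cons_of_pos (by simp [pvKeepTail, hc']), List.map_cons, ih]

theorem pvDropRev_hash (u : List Char) :
    PySem.Chars.startswith ((List.dropWhile PySem.Chars.isspace (u ++ ['#'])).reverse) ['#'] = true := by
  rw [List.dropWhile_append]
  by_cases he : ((u.dropWhile PySem.Chars.isspace)).isEmpty = true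
  · rw [if_pos he]
    decide
  · rw [if_neg he, List.reverse_append]
    cases hw : u.dropWhile PySem.Chars.isspace with
    | nil => rw [hw] at he; simp at he
    | cons a w =>
      simp [PySem.Chars.startswith]

theorem pvHashRstrip (t : List Char) :
    PySem.Chars.startswith (PySem.Chars.rstrip ('#' :: t)) ['#'] = true := by
  have : ('#' :: t).reverse = t.reverse ++ ['#'] := by simp
  simp only [PySem.Chars.rstrip, this]
  exact pvDropRev_hash t.reverse

theorem pvCmt_of_sheb (l : List Char) (h : pvSheb l = true) : pvCmt l = true := by
  rcases (List.isPrefixOf_iff_prefix).1 h with ⟨r, hr⟩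
  have hl : l = '#' :: ('!' :: r) := by rw [← hr]; rfl
  subst hl
  simp only [pvCmt, PySem.Chars.strip, PySem.Chars.lstrip]
  rw [List.dropWhile_cons_of_neg (by decide)]
  exact pvHashRstrip ('!' :: r)

theorem pvSig_eq (s : String) :
    pvSig s = (pvFilterLines (PySem.Chars.splitlines s.toList)).map pvCls := by
  unfold pvSig
  cases hL : PySem.Chars.splitlines s.toList with
  | nil => simp [pvFilterLines, show pvSheb ([] : List Char) = false from by decide]
  | cons l ls =>
    rw [List.headD_cons]
    by_cases hsb : pvSheb l = true
    · have hcm : pvCmt l = true := pvCmt_of_sheb l hsb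
      have hbl : pvBlank l = false :=
        pvBlank_of_startswith_hash l ['!'] (by simpa [pvSheb] using hsb)
      rw [if_pos hsb, List.filterMap_cons, if_pos hcm, pvFilterMap_eq]
      simp only [pvFilterLines, pvKeepHead, hsb, Bool.true_or, if_pos, List.singleton_append,
        List.map_cons]
      rw [show pvCls l = 2 from by simp [pvCls, hbl]]
    · have hsb' : pvSheb l = false := by revert hsb; cases pvSheb l <;> simp
      rw [if_neg (by simp [hsb']), List.nil_append, List.filterMap_cons]
      by_cases hcm : pvCmt l = true
      · rw [if_pos hcm, pvFilterMap_eq]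
        simp [pvFilterLines, pvKeepHead, hsb', hcm]
      · have hcm' : pvCmt l = false := by revert hcm; cases pvCmt l <;> simp
        rw [if_neg (by simp [hcm']), pvFilterMap_eq]
        simp [pvFilterLines, pvKeepHead, hsb', hcm']

theorem pvDropWhile_eq_drop {α : Type} (p : α → Bool) (l : List α) :
    l.dropWhile p = l.drop (l.takeWhile p).length := by
  induction l with
  | nil => rfl
  | cons a as ih =>
    by_cases hp : p a = true
    · rw [List.dropWhile_cons_of_pos hp, List.takeWhile_cons_of_pos hp, List.length_cons,
        List.drop_succ_cons, ih]
    · have hp' : p a = false := by revert hp; cases p a <;> simp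
      rw [List.dropWhile_cons_of_neg (by simp [hp']), List.takeWhile_cons_of_neg (by simp [hp']),
        List.length_nil, List.drop_zero]

theorem pvCls_le_one (l : List Char) (h : pvBlank l = true) : pvCls l ≤ 1 := by
  simp [pvCls, h]

theorem pvD_of_dq (s : String)
    (h : pvDq (pvFilterLines (PySem.Chars.splitlines s.toList)) = true) : D_trim_script_py s := by
  set F := pvFilterLines (PySem.Chars.splitlines s.toList) with hF
  obtain ⟨i, hi, h1i, hprev, hw⟩ := (pvDq_iff F).1 h
  obtain ⟨hbi, hne, hi1, hbi1, k, hk, hik, hbk⟩ := (pvW_iff F i).1 hw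
  -- the signature S and its values at i-1, i, i+1, k
  set S := F.map pvCls with hS
  have hlenS : S.length = F.length := by simp [hS]
  have hgS : ∀ j, j < F.length → S.getD j 0 = pvCls (F.getD j []) := by
    intro j hj
    rw [List.getD_eq_getElem _ _ (by omega), List.getD_eq_getElem _ _ hj]
    simp [hS]
  have hv1 : S.getD (i - 1) 0 = 2 := by
    rw [hgS (i - 1) (by omega)]
    simp only [pvCls, hprev]
    simp
  have hv2 : S.getD i 0 = 1 := by
    rw [hgS i (by omega)]
    have hpos : (F.getD i []).length.min 1 = 1 := Nat.min_eq_right (by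
      rcases Nat.eq_zero_or_pos (F.getD i []).length with h0 | h0
      · exact absurd (List.length_eq_zero_iff.1 h0) hne
      · omega)
    simp only [pvCls, hbi]
    rw [if_pos trivial, hpos]
  have hv3 : S.getD (i + 1) 0 ≤ 1 := by
    rw [hgS (i + 1) (by omega)]
    exact pvCls_le_one _ hbi1
  have hv4 : S.getD k 0 = 2 := by
    rw [hgS k (by omega)]
    simp only [pvCls, hbk]
    simp
  -- peel the trailing blanks: the dropWhile is S.take (S.length - m), reversed
  set m := (S.reverse.takeWhile (fun x => decide (x ≤ 1))).length with hm
  have hmle : m ≤ S.length := by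
    have := (List.takeWhile_prefix (l := S.reverse) (fun x => decide (x ≤ 1))).length_le
    simpa using this
  have hdw : S.reverse.dropWhile (fun x => decide (x ≤ 1)) = S.reverse.drop m :=
    pvDropWhile_eq_drop _ _
  have hdrop : S.reverse.drop m = (S.take (S.length - m)).reverse := List.drop_reverse
  -- S decomposes as its kept prefix ++ the reversed trailing-blank part
  have hdecomp : S = S.take (S.length - m) ++ (S.reverse.takeWhile (fun x => decide (x ≤ 1))).reverse := by
    have h1 : S.reverse = S.reverse.takeWhile (fun x => decide (x ≤ 1)) ++
        S.reverse.dropWhile (fun x => decide (x ≤ 1)) := (List.takeWhile_append_dropWhile).symm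
    calc S = S.reverse.reverse := by simp
    _ = (S.reverse.takeWhile (fun x => decide (x ≤ 1)) ++
          S.reverse.dropWhile (fun x => decide (x ≤ 1))).reverse := by rw [← h1]
    _ = (S.reverse.dropWhile (fun x => decide (x ≤ 1))).reverse ++
          (S.reverse.takeWhile (fun x => decide (x ≤ 1))).reverse := by rw [List.reverse_append]
    _ = S.take (S.length - m) ++ (S.reverse.takeWhile (fun x => decide (x ≤ 1))).reverse := by
          rw [hdw, hdrop, List.reverse_reverse]
  have hlentake : (S.take (S.length - m)).length = S.length - m := by simp
  -- every index ≥ S.length - m carries a value ≤ 1, hence k < S.length - m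
  have hhigh : ∀ j, S.length - m ≤ j → j < S.length → S.getD j 0 ≤ 1 := by
    intro j hge hj
    have hgd : S.getD j 0 =
        ((S.reverse.takeWhile (fun x => decide (x ≤ 1))).reverse).getD (j - (S.length - m)) 0 := by
      conv_lhs => rw [hdecomp]
      rw [List.getD_append_right]
      · rw [hlentake]
      · rw [hlentake]; omega
    have hjlt : j - (S.length - m) < (S.reverse.takeWhile (fun x => decide (x ≤ 1))).reverse.length := by
      simp only [List.length_reverse, ← hm]
      omega
    have hmem : S.getD j 0 ∈ (S.reverse.takeWhile (fun x => decide (x ≤ 1))).reverse := by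
      rw [hgd, List.getD_eq_getElem _ _ hjlt]
      exact List.getElem_mem _
    have := List.mem_takeWhile_imp (List.mem_reverse.1 hmem)
    simpa using this
  have hklt : k < S.length - m := by
    by_contra hc
    have := hhigh k (by omega) (by omega)
    omega
  set c := S.getD (i + 1) 0 with hc
  have hi2 : i + 1 < S.length - m := by omega
  refine ⟨c, hv3, ?_⟩
  rw [pvSig_eq s, ← hF, ← hS, hdw, hdrop]
  -- the pattern [2,1,c] sits at position i-1 of the kept prefix
  have hpat : [2, 1, c] <+: (S.take (S.length - m)).drop (i - 1) := by
    rw [List.prefix_iff_eq_take]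
    apply List.ext_getElem
    · simp
      omega
    · intro j hj1 hj2
      simp only [List.getElem_take, List.getElem_drop]
      have hj3 : j < 3 := by simpa using hj1
      have hjS : ∀ x, x < S.length → ∀ (hx : x < S.length), S[x]'hx = S.getD x 0 := by
        intro x hxl hx
        rw [List.getD_eq_getElem _ _ hxl]
      interval_cases j
      · simp only [Nat.add_zero]
        rw [hjS (i - 1) (by omega), hv1]
        rfl
      · have e1 : i - 1 + 1 = i := by omega
        simp only [e1]
        rw [hjS i (by omega), hv2]
        rfl
      · have e2 : i - 1 + 2 = i + 1 := by omega
        simp only [e2]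
        rw [hjS (i + 1) (by omega), ← hc]
        rfl
  have hsuf : (S.take (S.length - m)).drop (i - 1) <:+ S.take (S.length - m) :=
    List.drop_suffix _ _
  have hinf : [2, 1, c] <:+: S.take (S.length - m) :=
    hpat.isInfix.trans hsuf.isInfix
  rw [show [c, 1, 2] = [2, 1, c].reverse from rfl]
  exact (List.reverse_infix).2 hinf


-- ===== TIGHTNESS: inside D_ the two ports always differ =====
-- Strategy: the outputs' newline counts are (number of kept core lines) - 1, and under the
-- D_ pattern A's kept core has strictly more lines than B's.

-- every character of every line splitlines produces fails the line-break test
theorem pvGoMem (isB : Char → Bool) (cs cur : List Char) (acc : List (List Char))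
    (hcur : ∀ c ∈ cur, isB c = false)
    (hacc : ∀ l ∈ acc, ∀ c ∈ l, isB c = false) :
    ∀ l ∈ PySem.Chars.splitlines.go isB cs cur acc, ∀ c ∈ l, isB c = false := by
  induction cs, cur, acc using PySem.Chars.splitlines.go.induct (isB := isB) with
  | case1 cur acc h =>
    rw [PySem.Chars.splitlines.go]
    simp only [h, if_pos]
    intro l hl
    exact hacc l (by simpa using hl)
  | case2 cur acc h =>
    rw [PySem.Chars.splitlines.go]
    rw [if_neg h]
    intro l hl
    rcases List.mem_cons.1 (List.mem_reverse.1 hl) with h1 | h1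
    · subst h1; intro c hc; exact hcur c (List.mem_reverse.1 hc)
    · exact hacc l h1
  | case3 rest cur acc ih =>
    rw [PySem.Chars.splitlines.go]
    exact ih (by simp) (by
      intro l hl
      rcases List.mem_cons.1 hl with h1 | h1
      · subst h1; intro c hc; exact hcur c (List.mem_reverse.1 hc)
      · exact hacc l h1)
  | case4 c rest cur acc hne hB ih =>
    rw [PySem.Chars.splitlines.go]
    · rw [if_pos hB]
      exact ih (by simp) (by
        intro l hl
        rcases List.mem_cons.1 hl with h1 | h1
        · subst h1; intro d hd; exact hcur d (List.mem_reverse.1 hd)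
        · exact hacc l h1)
    · exact hne
  | case5 c rest cur acc hne hB ih =>
    rw [PySem.Chars.splitlines.go]
    · rw [if_neg hB]
      exact ih (by
        intro d hd
        rcases List.mem_cons.1 hd with h1 | h1
        · subst h1; revert hB; cases isB d <;> simp
        · exact hcur d h1) hacc
    · exact hne

theorem pvLines_no_newline (cs : List Char) :
    ∀ l ∈ PySem.Chars.splitlines cs, ('\n' : Char) ∉ l := by
  intro l hl hmem
  have h := pvGoMem _ cs [] [] (by simp) (by simp) l (by
    simpa [PySem.Chars.splitlines] using hl) '\n' hmem
  simp at h

theorem pvFilterLines_subset (ls : List (List Char)) : ∀ z ∈ pvFilterLines ls, z ∈ ls := by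
  intro z hz
  cases ls with
  | nil => simpa [pvFilterLines] using hz
  | cons l t =>
    simp only [pvFilterLines] at hz
    rcases List.mem_append.1 hz with h1 | h1
    · by_cases hk : pvKeepHead l = true
      · rw [if_pos hk] at h1; simp at h1; simp [h1]
      · rw [if_neg hk] at h1; simp at h1
    · exact List.mem_cons_of_mem _ (List.mem_of_mem_filter h1)

theorem pvCoreB_subset (L : List (List Char)) : ∀ z ∈ pvCoreB L, z ∈ L := by
  intro z hz
  exact List.mem_reverse.1 ((List.dropWhile_sublist _).mem (List.mem_reverse.1 hz))

-- count/strip machinery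
theorem pvCount_dropWhile (p : Char → Bool) (u : List Char)
    (h : List.count '\n' (u.takeWhile p) = 0) :
    List.count '\n' (u.dropWhile p) = List.count '\n' u := by
  conv_rhs => rw [← List.takeWhile_append_dropWhile (p := p) (l := u)]
  rw [List.count_append, h, Nat.zero_add]

theorem pvTakeWhile_left (p : Char → Bool) (a b : List Char)
    (h : ∃ x ∈ a, p x = false) :
    List.takeWhile p (a ++ b) = List.takeWhile p a := by
  rw [List.takeWhile_append]
  rw [if_neg]
  intro hlen
  have heq : a.takeWhile p = a := (List.takeWhile_prefix p).eq_of_length hlen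
  obtain ⟨x, hx, hpx⟩ := h
  have := List.mem_takeWhile_imp (p := p) (l := a) (by rw [heq]; exact hx)
  rw [hpx] at this
  exact Bool.false_ne_true this

theorem pvStrip_count (u : List Char)
    (h1 : List.count '\n' (u.takeWhile PySem.Chars.isspace) = 0)
    (h2 : List.count '\n' (u.reverse.takeWhile PySem.Chars.isspace) = 0)
    (h3 : ∃ ch ∈ u, PySem.Chars.isspace ch = false) :
    List.count '\n' (PySem.Chars.strip u) = List.count '\n' u := by
  have hw : List.count '\n' (PySem.Chars.lstrip u) = List.count '\n' u :=
    pvCount_dropWhile _ _ h1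
  have hw3 : ∃ ch ∈ PySem.Chars.lstrip u, PySem.Chars.isspace ch = false := by
    obtain ⟨ch, hch, hp⟩ := h3
    refine ⟨ch, ?_, hp⟩
    have : ch ∈ u.takeWhile PySem.Chars.isspace ++ u.dropWhile PySem.Chars.isspace := by
      rw [List.takeWhile_append_dropWhile]; exact hch
    rcases List.mem_append.1 this with hx | hx
    · have := List.mem_takeWhile_imp hx
      rw [hp] at this
      exact absurd this Bool.false_ne_true
    · exact hx
  have hrev : u.reverse = (PySem.Chars.lstrip u).reverse ++ (u.takeWhile PySem.Chars.isspace).reverse := by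
    rw [PySem.Chars.lstrip, ← List.reverse_append, List.takeWhile_append_dropWhile]
  have h2' : List.count '\n' ((PySem.Chars.lstrip u).reverse.takeWhile PySem.Chars.isspace) = 0 := by
    have hx : ∃ x ∈ (PySem.Chars.lstrip u).reverse, PySem.Chars.isspace x = false := by
      obtain ⟨ch, hch, hp⟩ := hw3
      exact ⟨ch, List.mem_reverse.2 hch, hp⟩
    rw [← pvTakeWhile_left PySem.Chars.isspace _ (u.takeWhile PySem.Chars.isspace).reverse hx, ← hrev]
    exact h2
  show List.count '\n' (PySem.Chars.rstrip (PySem.Chars.lstrip u)) = _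
  rw [PySem.Chars.rstrip, List.count_reverse, pvCount_dropWhile _ _ h2', List.count_reverse, hw]

theorem pvJoin_count (C : List (List Char)) (hC : C ≠ [])
    (hl : ∀ l ∈ C, List.count '\n' l = 0) :
    List.count '\n' (PySem.Chars.join ['\n'] C) + 1 = C.length := by
  induction C with
  | nil => exact absurd rfl hC
  | cons x m ih =>
    cases m with
    | nil =>
      have : PySem.Chars.join ['\n'] [x] = x := by
        simp [PySem.Chars.join, List.intercalate, List.intersperse]
      rw [this, hl x List.mem_cons_self]
      simp
    | cons y t =>
      have hih := ih (by simp) (fun l hm => hl l (List.mem_cons_of_mem _ hm))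
      rw [pvJoin_cons _ _ (by simp), List.count_append, List.count_cons,
        hl x List.mem_cons_self]
      simp only [List.length_cons] at hih ⊢
      simp
      omega

theorem pvCoreB_single_nonblank (x : List Char) (h : pvBlank x = false) : pvCoreB [x] = [x] := by
  unfold pvCoreB
  rw [show ([x] : List (List Char)).reverse = [x] from by simp,
    List.dropWhile_cons_of_neg (by simp [h])]
  simp

theorem pvCoreB_single_blank (x : List Char) (h : pvBlank x = true) : pvCoreB [x] = [] := by
  unfold pvCoreB
  rw [show ([x] : List (List Char)).reverse = [x] from by simp,
    List.dropWhile_cons_of_pos (by simp [h])]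
  simp

theorem pvNonblank_has_nonspace (l : List Char) (h : pvBlank l = false) :
    ∃ ch ∈ l, PySem.Chars.isspace ch = false := by
  by_contra hc
  push_neg at hc
  have : pvBlank l = true := (pvBlank_iff l).2 (by
    intro c hcl
    have := hc c hcl
    revert this; cases PySem.Chars.isspace c <;> simp)
  rw [h] at this; exact Bool.false_ne_true this

theorem pvCoreB_last_nonblank (L : List (List Char)) (h : pvCoreB L ≠ []) :
    ∃ C' z, pvCoreB L = C' ++ [z] ∧ pvBlank z = false := by
  cases hw : L.reverse.dropWhile pvBlank with
  | nil => exact absurd (by simp [pvCoreB, hw]) h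
  | cons y t =>
    refine ⟨t.reverse, y, by simp [pvCoreB, hw], pvDropWhile_head_false pvBlank _ _ _ hw⟩

-- the newline count of a trimmed script determines the number of kept core lines
theorem pvOut_count (L : List (List Char))
    (hne : ∃ z ∈ L, pvBlank z = false)
    (hhead : ∀ z t, L = z :: t → pvBlank z = false)
    (hnl : ∀ l ∈ L, ('\n' : Char) ∉ l) :
    List.count '\n' (PySem.Chars.strip (PySem.Chars.join ['\n'] L)) + 1 = (pvCoreB L).length := by
  rw [pvStrip_join_coreB]
  have hcne : pvCoreB L ≠ [] := by
    intro hc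
    obtain ⟨z, hz, hbz⟩ := hne
    have := (pvCoreB_nil_iff L).1 hc z hz
    rw [hbz] at this; exact Bool.false_ne_true this
  -- the core's lines carry no newline
  have hcnl : ∀ l ∈ pvCoreB L, List.count '\n' l = 0 := by
    intro l hl
    exact List.count_eq_zero.2 (hnl l (pvCoreB_subset L l hl))
  -- core head is a line of L and L's head, hence nonblank
  obtain ⟨c0, ct, hc0⟩ : ∃ c0 ct, pvCoreB L = c0 :: ct := by
    cases hx : pvCoreB L with
    | nil => exact absurd hx hcne
    | cons a b => exact ⟨a, b, rfl⟩
  have hc0nb : pvBlank c0 = false := by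
    obtain ⟨z, t, hzt⟩ : ∃ z t, L = z :: t := by
      cases hx : L with
      | nil =>
        subst hx
        simpa [pvCoreB] using hcne
      | cons a b => exact ⟨a, b, rfl⟩
    have hznb := hhead z t hzt
    -- coreB preserves a non-blank head
    have : pvCoreB L = z :: pvCoreB t ∨ pvCoreB L = [z] := by
      rw [hzt, pvCoreB_cons]
      by_cases hx : pvCoreB t = []
      · right
        rw [if_pos hx]
        exact pvCoreB_single_nonblank z hznb
      · left; rw [if_neg hx]
    rcases this with h | h <;>
    · rw [hc0] at h
      injection h with h1 _
      rw [← h1] at hznb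
      exact hznb
  obtain ⟨C', z, hdec, hznb⟩ := pvCoreB_last_nonblank L hcne
  -- strip does not touch any newline of the joined core
  have hu1 : List.count '\n'
      ((PySem.Chars.join ['\n'] (pvCoreB L)).takeWhile PySem.Chars.isspace) = 0 := by
    have hj : PySem.Chars.join ['\n'] (pvCoreB L) = c0 ++
        (if ct = [] then [] else '\n' :: PySem.Chars.join ['\n'] ct) := by
      rw [hc0]
      cases hct : ct with
      | nil => simp [PySem.Chars.join, List.intercalate, List.intersperse]
      | cons a b => rw [if_neg (by simp), pvJoin_cons _ _ (by simp)]
    rw [hj, pvTakeWhile_left _ _ _ (pvNonblank_has_nonspace c0 hc0nb)]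
    exact List.count_eq_zero.2 (fun hc =>
      hnl c0 (pvCoreB_subset L c0 (by rw [hc0]; exact List.mem_cons_self))
        ((List.takeWhile_sublist _).mem hc))
  have hu2 : List.count '\n'
      ((PySem.Chars.join ['\n'] (pvCoreB L)).reverse.takeWhile PySem.Chars.isspace) = 0 := by
    have hj : (PySem.Chars.join ['\n'] (pvCoreB L)).reverse = z.reverse ++
        (if C' = [] then [] else '\n' :: (PySem.Chars.join ['\n'] C').reverse) := by
      rw [hdec]
      cases hC' : C' with
      | nil => simp [PySem.Chars.join, List.intercalate]
      | cons a b =>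
        rw [if_neg (by simp), pvJoin_append_single _ _ (by simp), List.reverse_append]
        simp
    have hzrev : ∃ ch ∈ z.reverse, PySem.Chars.isspace ch = false := by
      obtain ⟨ch, hch, hp⟩ := pvNonblank_has_nonspace z hznb
      exact ⟨ch, List.mem_reverse.2 hch, hp⟩
    rw [hj, pvTakeWhile_left _ _ _ hzrev]
    have hzmem : z ∈ pvCoreB L := by rw [hdec]; simp
    exact List.count_eq_zero.2 (fun hc =>
      hnl z (pvCoreB_subset L z hzmem)
        (List.mem_reverse.1 ((List.takeWhile_sublist _).mem hc)))
  have hu3 : ∃ ch ∈ PySem.Chars.join ['\n'] (pvCoreB L), PySem.Chars.isspace ch = false := by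
    obtain ⟨ch, hch, hp⟩ := pvNonblank_has_nonspace c0 hc0nb
    refine ⟨ch, ?_, hp⟩
    rw [hc0]
    cases hct : ct with
    | nil => simpa [PySem.Chars.join, List.intercalate, List.intersperse] using hch
    | cons a b => rw [pvJoin_cons _ _ (by simp)]; exact List.mem_append.2 (Or.inl hch)
  rw [pvStrip_count _ hu1 hu2 hu3]
  exact pvJoin_count _ hcne hcnl

-- line weights: number of core lines
def pvWc (L : List (List Char)) : Nat := (pvCoreB L).length

theorem pvWc_cons_nonblank (x : List Char) (l : List (List Char)) (h : pvBlank x = false) :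
    pvWc (x :: l) = pvWc l + 1 := by
  unfold pvWc
  rw [pvCoreB_cons]
  by_cases hx : pvCoreB l = []
  · rw [if_pos hx, hx, pvCoreB_single_nonblank x h]
    simp
  · rw [if_neg hx]
    simp

theorem pvWc_cons_blank_eq (x : List Char) (l : List (List Char)) (_hx : pvBlank x = true)
    (h : pvCoreB l ≠ []) : pvWc (x :: l) = pvWc l + 1 := by
  unfold pvWc
  rw [pvCoreB_cons, if_neg h]
  simp

theorem pvWc_cons_blank_le (x : List Char) (l : List (List Char)) (hx : pvBlank x = true) :
    pvWc l ≤ pvWc (x :: l) := by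
  by_cases h : pvCoreB l = []
  · unfold pvWc; rw [h]; simp
  · rw [pvWc_cons_blank_eq x l hx h]; omega

theorem pvWc_cons_upper (x : List Char) (l : List (List Char)) : pvWc (x :: l) ≤ pvWc l + 1 := by
  unfold pvWc
  rw [pvCoreB_cons]
  by_cases hx : pvCoreB l = []
  · rw [if_pos hx, hx]
    have hs : (List.dropWhile pvBlank ([x] : List (List Char)).reverse).length ≤ 1 := by
      calc (List.dropWhile pvBlank ([x] : List (List Char)).reverse).length
          ≤ (([x] : List (List Char)).reverse).length := (List.dropWhile_sublist _).length_le
      _ = 1 := by simp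
    unfold pvCoreB
    simp only [List.length_reverse, List.length_nil]
    omega
  · rw [if_neg hx]; simp

theorem pvCoreB_ne_nil (l : List (List Char)) (h : ∃ z ∈ l, pvBlank z = false) :
    pvCoreB l ≠ [] := by
  intro hc
  obtain ⟨z, hz, hbz⟩ := h
  have := (pvCoreB_nil_iff l).1 hc z hz
  rw [hbz] at this; exact Bool.false_ne_true this

theorem pvG_has_nonblank (xs : List (List Char)) :
    ∀ b, (∃ z ∈ xs, pvBlank z = false) → ∃ z ∈ pvG b xs, pvBlank z = false := by
  induction xs with
  | nil => intro b h; simpa using h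
  | cons x t ih =>
    intro b h
    obtain ⟨z, hz, hbz⟩ := h
    rw [pvG]
    by_cases hc : (pvBlank x && b) = true
    · rw [if_pos hc]
      rcases List.mem_cons.1 hz with h1 | h1
      · subst h1
        have : pvBlank z = true := by
          revert hc; cases pvBlank z <;> simp
        rw [hbz] at this; exact absurd this (by simp)
      · exact ih _ ⟨z, h1, hbz⟩
    · rw [if_neg hc]
      rcases List.mem_cons.1 hz with h1 | h1
      · subst h1; exact ⟨z, List.mem_cons_self, hbz⟩
      · obtain ⟨w, hw, hbw⟩ := ih (x == []) ⟨z, h1, hbz⟩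
        exact ⟨w, List.mem_cons_of_mem _ hw, hbw⟩

theorem pvH_has_nonblank (xs : List (List Char)) :
    ∀ b, (∃ z ∈ xs, pvBlank z = false) → ∃ z ∈ pvH b xs, pvBlank z = false := by
  induction xs with
  | nil => intro b h; simpa using h
  | cons x t ih =>
    intro b h
    obtain ⟨z, hz, hbz⟩ := h
    rw [pvH]
    by_cases hc : (pvBlank x && b) = true
    · rw [if_pos hc]
      rcases List.mem_cons.1 hz with h1 | h1
      · subst h1
        have : pvBlank z = true := by
          revert hc; cases pvBlank z <;> simp
        rw [hbz] at this; exact absurd this (by simp)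
      · exact ih _ ⟨z, h1, hbz⟩
    · rw [if_neg hc]
      rcases List.mem_cons.1 hz with h1 | h1
      · subst h1; exact ⟨z, List.mem_cons_self, hbz⟩
      · obtain ⟨w, hw, hbw⟩ := ih (pvBlank x) ⟨z, h1, hbz⟩
        exact ⟨w, List.mem_cons_of_mem _ hw, hbw⟩

-- shifting the difference pattern下 one line
theorem pvW_unshift (x : List Char) (t : List (List Char)) (i : Nat)
    (h : pvW (x :: t) (i + 1) = true) : pvW t i = true := by
  rw [pvW_iff] at h ⊢
  obtain ⟨h1, h2, h3, h4, k, hk, hik, hbk⟩ := h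
  have hg : ∀ j, (x :: t).getD (j + 1) [] = t.getD j [] := fun j => rfl
  refine ⟨by rw [← hg]; exact h1, by rw [← hg]; exact h2, by simp at h3; omega,
    by rw [← hg]; exact h4, k - 1, by simp at hk; omega, by omega, ?_⟩
  have : k - 1 + 1 = k := by omega
  rw [← hg, this]
  exact hbk

theorem pvDq_down_nonblank (x : List Char) (t : List (List Char))
    (hd : pvDq (x :: t) = true) (_hx : pvBlank x = false) :
    (pvW t 0 || pvDq t) = true := by
  obtain ⟨i, hi, h1i, hprev, hw⟩ := (pvDq_iff _).1 hd
  rcases Nat.eq_or_lt_of_le h1i with h1 | h1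
  · -- i = 1 : the pattern starts right after x
    have : pvW t 0 = true := by
      have : i - 1 + 1 = i := by omega
      apply pvW_unshift x t 0
      rw [show (0 : Nat) + 1 = i from by omega]
      exact hw
    simp [this]
  · -- i ≥ 2 : the pattern lives in t
    have hqt : pvDq t = true := by
      rw [pvDq_iff]
      refine ⟨i - 1, by simp at hi; omega, by omega, ?_, ?_⟩
      · have : (x :: t).getD (i - 1) [] = t.getD (i - 2) [] := by
          rw [show i - 1 = (i - 2) + 1 from by omega]; rfl
        rw [this] at hprev
        rw [show i - 1 - 1 = i - 2 from by omega]
        exact hprev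
      · apply pvW_unshift x t (i - 1)
        rw [show i - 1 + 1 = i from by omega]
        exact hw
    simp [hqt]

theorem pvDq_down_blank (x : List Char) (t : List (List Char))
    (hd : pvDq (x :: t) = true) (hx : pvBlank x = true) : pvDq t = true := by
  obtain ⟨i, hi, h1i, hprev, hw⟩ := (pvDq_iff _).1 hd
  have h2 : 2 ≤ i := by
    rcases Nat.eq_or_lt_of_le h1i with h1 | h1
    · exfalso
      have : (x :: t).getD (i - 1) [] = x := by rw [show i - 1 = 0 from by omega]; rfl
      rw [this, hx] at hprev
      exact absurd hprev (by simp)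
    · omega
  rw [pvDq_iff]
  refine ⟨i - 1, by simp at hi; omega, by omega, ?_, ?_⟩
  · have : (x :: t).getD (i - 1) [] = t.getD (i - 2) [] := by
      rw [show i - 1 = (i - 2) + 1 from by omega]; rfl
    rw [this] at hprev
    rw [show i - 1 - 1 = i - 2 from by omega]
    exact hprev
  · apply pvW_unshift x t (i - 1)
    rw [show i - 1 + 1 = i from by omega]
    exact hw

theorem pvW0_struct (x : List Char) (t : List (List Char)) (h : pvW (x :: t) 0 = true) :
    pvBlank x = true ∧ x ≠ [] ∧ ∃ y ys, t = y :: ys ∧ pvBlank y = true ∧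
      ∃ z ∈ ys, pvBlank z = false := by
  rw [pvW_iff] at h
  obtain ⟨h1, h2, h3, h4, k, hk, hik, hbk⟩ := h
  obtain ⟨y, ys, hys⟩ : ∃ y ys, t = y :: ys := by
    cases ht : t with
    | nil => subst ht; simp at h3
    | cons a b => exact ⟨a, b, rfl⟩
  subst hys
  refine ⟨by simpa using h1, by simpa using h2, y, ys, rfl, by simpa using h4, ?_⟩
  have hk2 : 2 ≤ k := by omega
  have hkl : k - 2 < ys.length := by simp at hk; omega
  refine ⟨ys[k - 2], List.getElem_mem _, ?_⟩
  have : (x :: y :: ys).getD k [] = ys.getD (k - 2) [] := by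
    rw [show k = (k - 2) + 2 from by omega]; rfl
  rw [this, List.getD_eq_getElem _ _ hkl] at hbk
  exact hbk

-- the seed of the strict surplus: a blank run head followed by a later code line
theorem pvL0 (y : List Char) (ys : List (List Char)) (hy : pvBlank y = true)
    (hz : ∃ z ∈ ys, pvBlank z = false)
    (hbase : pvWc (pvG (y == []) ys) ≥ pvWc (pvH true ys)) :
    pvWc (pvG false (y :: ys)) ≥ pvWc (pvH true (y :: ys)) + 1 := by
  rw [pvG, if_neg (by simp), pvH, if_pos (by simp [hy])]
  have hGne : pvCoreB (pvG (y == []) ys) ≠ [] :=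
    pvCoreB_ne_nil _ (pvG_has_nonblank ys _ hz)
  rw [pvWc_cons_blank_eq y _ hy hGne]
  omega

-- the six-way count comparison: A's core never has fewer lines than B's, and inside the
-- difference pattern it has strictly more
theorem pvCnt (n : Nat) : ∀ xs : List (List Char), xs.length ≤ n →
    (pvWc (pvG false xs) ≥ pvWc (pvH false xs)) ∧
    (pvWc (pvG true xs) ≥ pvWc (pvH true xs)) ∧
    (pvWc (pvG false xs) ≥ pvWc (pvH true xs)) ∧
    ((pvW xs 0 || pvDq xs) = true → pvWc (pvG false xs) ≥ pvWc (pvH false xs) + 1) ∧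
    (pvDq xs = true → pvWc (pvG true xs) ≥ pvWc (pvH true xs) + 1) ∧
    ((pvW xs 0 || pvDq xs) = true → pvWc (pvG false xs) ≥ pvWc (pvH true xs) + 1) := by
  induction n with
  | zero =>
    intro xs hlen
    have hx : xs = [] := List.length_eq_zero_iff.1 (Nat.le_zero.1 hlen)
    subst hx
    refine ⟨le_rfl, le_rfl, le_rfl, ?_, ?_, ?_⟩ <;> intro h <;> simp [pvW, pvDq] at h
  | succ n ih =>
    intro xs hlen
    cases xs with
    | nil =>
      refine ⟨le_rfl, le_rfl, le_rfl, ?_, ?_, ?_⟩ <;> intro h <;> simp [pvW, pvDq] at h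
    | cons x t =>
      have hlt : t.length ≤ n := by simpa using hlen
      obtain ⟨ihB1, ihB2, ihB3, ihT1, ihT2, ihT3⟩ := ih t hlt
      by_cases hb : pvBlank x = true
      · by_cases hxe : x = []
        · -- x is the empty line: G and H march in step
          subst hxe
          have hGf : pvG false ([] :: t) = [] :: pvG true t := by
            rw [pvG, if_neg (by simp)]; rfl
          have hHf : pvH false ([] :: t) = [] :: pvH true t := by
            rw [pvH, if_neg (by simp), pvBlank_nil]
          have hGt : pvG true ([] :: t) = pvG true t := by
            rw [pvG, if_pos (by simp [pvBlank_nil])]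
          have hHt : pvH true ([] :: t) = pvH true t := by
            rw [pvH, if_pos (by simp [pvBlank_nil])]
          have hcons : ∀ l₁ l₂ : List (List Char), pvWc l₁ ≥ pvWc l₂ →
              (pvCoreB l₂ ≠ [] → pvCoreB l₁ ≠ []) → pvWc ([] :: l₁) ≥ pvWc ([] :: l₂) := by
            intro l₁ l₂ hge hne
            by_cases hc : pvCoreB l₂ = []
            · unfold pvWc
              rw [pvCoreB_cons ([]) l₂, if_pos hc, pvCoreB_single_blank [] pvBlank_nil]
              simp
            · rw [pvWc_cons_blank_eq _ _ pvBlank_nil hc, pvWc_cons_blank_eq _ _ pvBlank_nil (hne hc)]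
              omega
          have hconss : ∀ l₁ l₂ : List (List Char), pvWc l₁ ≥ pvWc l₂ + 1 →
              pvWc ([] :: l₁) ≥ pvWc ([] :: l₂) + 1 := by
            intro l₁ l₂ hge
            have hl₁ : pvCoreB l₁ ≠ [] := by
              intro hc
              have : pvWc l₁ = 0 := by unfold pvWc; rw [hc]; rfl
              omega
            rw [pvWc_cons_blank_eq _ _ pvBlank_nil hl₁]
            have := pvWc_cons_upper ([] : List Char) l₂
            omega
          have htrans : pvCoreB (pvH true t) ≠ [] → pvCoreB (pvG true t) ≠ [] := by
            intro hne hc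
            obtain ⟨z, hz, hbz⟩ : ∃ z ∈ pvH true t, pvBlank z = false := by
              by_contra hcon
              push_neg at hcon
              exact hne ((pvCoreB_nil_iff _).2 (fun a ha => by
                have := hcon a ha
                revert this; cases pvBlank a <;> simp))
            obtain ⟨w, hw, hbw⟩ := pvG_has_nonblank t true ⟨z, pvH_subset true t z hz, hbz⟩
            have := (pvCoreB_nil_iff _).1 hc w hw
            rw [hbw] at this; exact Bool.false_ne_true this
          refine ⟨?_, ?_, ?_, ?_, ?_, ?_⟩
          · rw [hGf, hHf]; exact hcons _ _ ihB2 htrans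
          · rw [hGt, hHt]; exact ihB2
          · rw [hGf, hHt]
            calc pvWc (pvH true t) ≤ pvWc (pvG true t) := ihB2
            _ ≤ pvWc ([] :: pvG true t) := pvWc_cons_blank_le _ _ pvBlank_nil
          · intro hD
            rw [hGf, hHf]
            have hW0 : pvW ([] :: t) 0 = false := by
              rw [Bool.eq_false_iff]
              intro hw
              have := (pvW0_struct _ _ hw).2.1
              exact this rfl
            rw [hW0, Bool.false_or] at hD
            exact hconss _ _ (ihT2 (pvDq_down_blank _ _ hD pvBlank_nil))
          · intro hD
            rw [hGt, hHt]
            exact ihT2 (pvDq_down_blank _ _ hD pvBlank_nil)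
          · intro hD
            rw [hGf, hHt]
            have hW0 : pvW ([] :: t) 0 = false := by
              rw [Bool.eq_false_iff]
              intro hw
              exact (pvW0_struct _ _ hw).2.1 rfl
            rw [hW0, Bool.false_or] at hD
            have := ihT2 (pvDq_down_blank _ _ hD pvBlank_nil)
            calc pvWc (pvH true t) + 1 ≤ pvWc (pvG true t) := this
            _ ≤ pvWc ([] :: pvG true t) := pvWc_cons_blank_le _ _ pvBlank_nil
        · -- x is a whitespace-only but non-empty line
          have hxb : (x == []) = false := by simp [hxe]
          have hGf : pvG false (x :: t) = x :: pvG false t := by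
            rw [pvG, if_neg (by simp), hxb]
          have hHf : pvH false (x :: t) = x :: pvH true t := by
            rw [pvH, if_neg (by simp), hb]
          have hGt : pvG true (x :: t) = pvG true t := by
            rw [pvG, if_pos (by simp [hb])]
          have hHt : pvH true (x :: t) = pvH true t := by
            rw [pvH, if_pos (by simp [hb])]
          have hcons : ∀ l₁ l₂ : List (List Char), pvWc l₁ ≥ pvWc l₂ →
              (pvCoreB l₂ ≠ [] → pvCoreB l₁ ≠ []) → pvWc (x :: l₁) ≥ pvWc (x :: l₂) := by
            intro l₁ l₂ hge hne
            by_cases hc : pvCoreB l₂ = []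
            · unfold pvWc
              rw [pvCoreB_cons x l₂, if_pos hc, pvCoreB_single_blank x hb]
              simp
            · rw [pvWc_cons_blank_eq _ _ hb hc, pvWc_cons_blank_eq _ _ hb (hne hc)]
              omega
          have htrans : pvCoreB (pvH true t) ≠ [] → pvCoreB (pvG false t) ≠ [] := by
            intro hne hc
            obtain ⟨z, hz, hbz⟩ : ∃ z ∈ pvH true t, pvBlank z = false := by
              by_contra hcon
              push_neg at hcon
              exact hne ((pvCoreB_nil_iff _).2 (fun a ha => by
                have := hcon a ha
                revert this; cases pvBlank a <;> simp))
            obtain ⟨w, hw, hbw⟩ := pvG_has_nonblank t false ⟨z, pvH_subset true t z hz, hbz⟩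
            have := (pvCoreB_nil_iff _).1 hc w hw
            rw [hbw] at this; exact Bool.false_ne_true this
          refine ⟨?_, ?_, ?_, ?_, ?_, ?_⟩
          · rw [hGf, hHf]; exact hcons _ _ ihB3 htrans
          · rw [hGt, hHt]; exact ihB2
          · rw [hGf, hHt]
            calc pvWc (pvH true t) ≤ pvWc (pvG false t) := ihB3
            _ ≤ pvWc (x :: pvG false t) := pvWc_cons_blank_le _ _ hb
          · intro hD
            rw [hGf, hHf]
            rcases Bool.or_eq_true_iff.1 hD with hW | hDq
            · -- the pattern starts at x itself
              obtain ⟨_, _, y, ys, hys, hy, hzys⟩ := pvW0_struct x t hW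
              subst hys
              have hG0 : pvG false (y :: ys) = y :: pvG (y == []) ys := by
                rw [pvG, if_neg (by simp)]
              have hzy : ∃ z ∈ y :: ys, pvBlank z = false := by
                obtain ⟨z, hz, hbz⟩ := hzys
                exact ⟨z, List.mem_cons_of_mem _ hz, hbz⟩
              have hGne : pvCoreB (pvG false (y :: ys)) ≠ [] :=
                pvCoreB_ne_nil _ (pvG_has_nonblank _ _ hzy)
              have hHne : pvCoreB (pvH true (y :: ys)) ≠ [] := by
                apply pvCoreB_ne_nil
                apply pvH_has_nonblank
                exact hzy
              rw [pvWc_cons_blank_eq _ _ hb hGne, pvWc_cons_blank_eq _ _ hb hHne]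
              obtain ⟨_, ysB2, ysB3, _, _, _⟩ := ih ys (by simp at hlt; omega)
              have hL0 := pvL0 y ys hy hzys (by
                cases hye : (y == []) with
                | true =>
                  have : y = [] := by simpa using hye
                  subst this; exact ysB2
                | false => exact ysB3)
              omega
            · -- the pattern is further down
              have hdq : pvDq t = true := pvDq_down_blank x t hDq hb
              have hnbt : ∃ z ∈ t, pvBlank z = false := by
                obtain ⟨i, hi, h1i, hprev, hw⟩ := (pvDq_iff _).1 hdq
                refine ⟨t.getD (i - 1) [], ?_, hprev⟩
                rw [List.getD_eq_getElem _ _ (by omega)]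
                exact List.getElem_mem _
              have hGne : pvCoreB (pvG false t) ≠ [] :=
                pvCoreB_ne_nil _ (pvG_has_nonblank _ _ hnbt)
              have hHne : pvCoreB (pvH true t) ≠ [] :=
                pvCoreB_ne_nil _ (pvH_has_nonblank _ _ hnbt)
              rw [pvWc_cons_blank_eq _ _ hb hGne, pvWc_cons_blank_eq _ _ hb hHne]
              have := ihT3 (by simp [hdq])
              omega
          · intro hD
            rw [hGt, hHt]
            exact ihT2 (pvDq_down_blank _ _ hD hb)
          · intro hD
            rw [hGf, hHt]
            rcases Bool.or_eq_true_iff.1 hD with hW | hDq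
            · obtain ⟨_, _, y, ys, hys, hy, hzys⟩ := pvW0_struct x t hW
              subst hys
              obtain ⟨_, ysB2, ysB3, _, _, _⟩ := ih ys (by simp at hlt; omega)
              have := pvL0 y ys hy hzys (by
                cases hye : (y == []) with
                | true =>
                  have : y = [] := by simpa using hye
                  subst this; exact ysB2
                | false => exact ysB3)
              calc pvWc (pvH true (y :: ys)) + 1 ≤ pvWc (pvG false (y :: ys)) := this
              _ ≤ pvWc (x :: pvG false (y :: ys)) := pvWc_cons_blank_le _ _ hb
            · have hdq : pvDq t = true := pvDq_down_blank x t hDq hb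
              have := ihT3 (by simp [hdq])
              calc pvWc (pvH true t) + 1 ≤ pvWc (pvG false t) := this
              _ ≤ pvWc (x :: pvG false t) := pvWc_cons_blank_le _ _ hb
      · -- x is a code line: both keep it and return to the synchronized state
        have hb' : pvBlank x = false := by revert hb; cases pvBlank x <;> simp
        have hxb : (x == []) = false := pvBeq_nil_false x hb'
        have hGf : pvG false (x :: t) = x :: pvG false t := by
          rw [pvG, if_neg (by simp [hb']), hxb]
        have hGt : pvG true (x :: t) = x :: pvG false t := by
          rw [pvG, if_neg (by simp [hb']), hxb]
        have hHf : pvH false (x :: t) = x :: pvH false t := by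
          rw [pvH, if_neg (by simp [hb']), hb']
        have hHt : pvH true (x :: t) = x :: pvH false t := by
          rw [pvH, if_neg (by simp [hb']), hb']
        have hdown : (pvW (x :: t) 0 || pvDq (x :: t)) = true →
            (pvW t 0 || pvDq t) = true := by
          intro hD
          rcases Bool.or_eq_true_iff.1 hD with hW | hDq
          · exfalso
            have := (pvW0_struct x t hW).1
            rw [hb'] at this; exact Bool.false_ne_true this
          · exact pvDq_down_nonblank x t hDq hb'
        refine ⟨?_, ?_, ?_, ?_, ?_, ?_⟩
        · rw [hGf, hHf, pvWc_cons_nonblank _ _ hb', pvWc_cons_nonblank _ _ hb']; omega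
        · rw [hGt, hHt, pvWc_cons_nonblank _ _ hb', pvWc_cons_nonblank _ _ hb']; omega
        · rw [hGf, hHt, pvWc_cons_nonblank _ _ hb', pvWc_cons_nonblank _ _ hb']; omega
        · intro hD
          rw [hGf, hHf, pvWc_cons_nonblank _ _ hb', pvWc_cons_nonblank _ _ hb']
          have := ihT1 (hdown hD)
          omega
        · intro hD
          rw [hGt, hHt, pvWc_cons_nonblank _ _ hb', pvWc_cons_nonblank _ _ hb']
          have := ihT1 (hdown (by simp [hD]))
          omega
        · intro hD
          rw [hGf, hHt, pvWc_cons_nonblank _ _ hb', pvWc_cons_nonblank _ _ hb']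
          have := ihT1 (hdown hD)
          omega

-- the D_ pattern forces the index form pvDq on the filtered lines (converse bridge)
theorem pvGetD_take (S : List Nat) (n i : Nat) (h : i < n) :
    (S.take n).getD i 0 = S.getD i 0 := by
  rw [List.getD_eq_getElem?_getD, List.getD_eq_getElem?_getD, List.getElem?_take_of_lt h]

-- the D_ pattern forces the index form pvDq on the filtered lines (converse bridge)
theorem pvDq_of_D (s : String) (hD : D_trim_script_py s) :
    pvDq (pvFilterLines (PySem.Chars.splitlines s.toList)) = true := by
  obtain ⟨c, hc, hinf⟩ := hD
  rw [pvSig_eq s] at hinf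
  set F := pvFilterLines (PySem.Chars.splitlines s.toList) with hF
  set S := F.map pvCls with hS
  set m := (S.reverse.takeWhile (fun x => decide (x ≤ 1))).length with hm
  have hmle : m ≤ S.length := by
    have := (List.takeWhile_prefix (l := S.reverse) (fun x => decide (x ≤ 1))).length_le
    simpa using this
  set q := S.length - m with hq
  have hdw : S.reverse.dropWhile (fun x => decide (x ≤ 1)) = (S.take q).reverse := by
    rw [pvDropWhile_eq_drop, ← hm, List.drop_reverse]
  rw [hdw] at hinf
  have hinf2 : [2, 1, c] <:+: S.take q := by
    have hrev : ([2, 1, c] : List Nat).reverse <:+: (S.take q).reverse := by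
      simpa using hinf
    exact (List.reverse_infix).1 hrev
  obtain ⟨u, v, huv⟩ := hinf2
  set p := u.length with hp
  have hlenq : (S.take q).length = q := by simp [hq]
  have hql : q = p + 3 + v.length := by
    have := congrArg List.length huv
    simp [hlenq] at this
    omega
  -- read the pattern values out of the kept prefix through getD
  have hdropP : (S.take q).drop p = 2 :: 1 :: c :: v := by
    rw [hp, ← huv, List.append_assoc, List.drop_left]
    rfl
  have hgd : ∀ j, j < 3 + v.length → S.getD (p + j) 0 = (2 :: 1 :: c :: v).getD j 0 := by
    intro j hj
    have e1 : ((S.take q).drop p)[j]? = (S.take q)[p + j]? := List.getElem?_drop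
    rw [List.getD_eq_getElem?_getD, List.getD_eq_getElem?_getD,
      ← List.getElem?_take_of_lt (show p + j < q from by omega) (l := S), ← e1, hdropP]
  have hS0 : S.getD p 0 = 2 := by simpa using hgd 0 (by omega)
  have hS1 : S.getD (p + 1) 0 = 1 := by simpa using hgd 1 (by omega)
  have hS2 : S.getD (p + 2) 0 = c := by simpa using hgd 2 (by omega)
  -- the trailing part cannot be empty: the kept prefix ends in a value above 1
  have hvne : v ≠ [] := by
    intro hv
    subst hv
    have h2 : (S.take q).reverse = c :: 1 :: 2 :: u.reverse := by
      rw [← huv]; simp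
    have h3 := pvDropWhile_head_false (fun x => decide (x ≤ 1)) S.reverse c
      (1 :: 2 :: u.reverse) (by rw [hdw, h2])
    simp at h3
    omega
  have hvlen : 1 ≤ v.length := by
    cases hv : v with
    | nil => exact absurd hv hvne
    | cons a b => simp
  -- the last kept value fails (≤ 1)
  have hSl : 2 ≤ S.getD (q - 1) 0 := by
    cases hT : S.reverse.dropWhile (fun x => decide (x ≤ 1)) with
    | nil =>
      rw [hdw] at hT
      have := congrArg List.length hT
      simp [hlenq] at this
      omega
    | cons y tl =>
      have hfail := pvDropWhile_head_false (fun x => decide (x ≤ 1)) S.reverse y tl hT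
      have htake : S.take q = tl.reverse ++ [y] := by
        have h2 : ((S.take q).reverse).reverse = (y :: tl).reverse := by
          rw [← hdw, hT]
        simpa using h2
      have hlen2 : q = tl.length + 1 := by
        have := congrArg List.length htake
        simp [hlenq] at this
        omega
      have : S.getD (q - 1) 0 = y := by
        rw [← pvGetD_take S q (q - 1) (by omega), htake, List.getD_append_right]
        · simp [hlen2]
        · simp; omega
      rw [this]
      simp at hfail
      omega
  -- back from classes to line facts
  have hlenS : S.length = F.length := by simp [hS]
  have hclsF : ∀ j, j < F.length → S.getD j 0 = pvCls (F.getD j []) := by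
    intro j hj
    rw [List.getD_eq_getElem _ _ (by omega), List.getD_eq_getElem _ _ hj]
    simp [hS]
  have hnb : ∀ j, j < F.length → 2 ≤ S.getD j 0 → pvBlank (F.getD j []) = false := by
    intro j hj h2
    rw [hclsF j hj] at h2
    by_contra hcon
    have hbl : pvBlank (F.getD j []) = true := by
      revert hcon; cases pvBlank (F.getD j []) <;> simp
    have := pvCls_le_one (F.getD j []) hbl
    omega
  have hblk : ∀ j, j < F.length → S.getD j 0 ≤ 1 → pvBlank (F.getD j []) = true := by
    intro j hj h1
    rw [hclsF j hj] at h1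
    by_contra hcon
    have hbl : pvBlank (F.getD j []) = false := by
      revert hcon; cases pvBlank (F.getD j []) <;> simp
    rw [pvCls, if_neg (fun hcon2 => Bool.false_ne_true (hbl.symm.trans hcon2))] at h1
    omega
  have hqF : q ≤ F.length := by omega
  rw [pvDq_iff]
  refine ⟨p + 1, by omega, by omega, ?_, ?_⟩
  · rw [show p + 1 - 1 = p from by omega]
    exact hnb p (by omega) (by omega)
  · rw [pvW_iff]
    refine ⟨hblk (p + 1) (by omega) (by omega), ?_, by omega,
      hblk (p + 2) (by omega) (by omega), q - 1, by omega, by omega, ?_⟩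
    · intro hnil
      have hcl := hclsF (p + 1) (by omega)
      rw [hS1, hnil] at hcl
      simp [pvCls, pvBlank_nil] at hcl
    · exact hnb (q - 1) (by omega) hSl

theorem pvHead_nonblank_G (L : List (List Char)) :
    ∀ z t, pvG true L = z :: t → pvBlank z = false := by
  induction L with
  | nil => intro z t h; simp [pvG] at h
  | cons x xs ih =>
    intro z t h
    rw [pvG] at h
    by_cases hb : pvBlank x = true
    · rw [if_pos (by simp [hb])] at h
      exact ih z t h
    · have hb' : pvBlank x = false := by revert hb; cases pvBlank x <;> simp
      rw [if_neg (by simp [hb'])] at h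
      cases h
      exact hb'

theorem pvHead_nonblank_H (L : List (List Char)) :
    ∀ z t, pvH true L = z :: t → pvBlank z = false := by
  induction L with
  | nil => intro z t h; simp [pvH] at h
  | cons x xs ih =>
    intro z t h
    rw [pvH] at h
    by_cases hb : pvBlank x = true
    · rw [if_pos (by simp [hb])] at h
      exact ih z t h
    · have hb' : pvBlank x = false := by revert hb; cases pvBlank x <;> simp
      rw [if_neg (by simp [hb'])] at h
      cases h
      exact hb'

-- ===== VERDICT (by name: the statement is the Claim_ definition above) =====
theorem trim_script_py_spec : Claim_unchanged_trim_script_py := by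
  intro script _ hD
  have hDq : pvDq (pvFilterLines (PySem.Chars.splitlines script.toList)) = false := by
    by_contra hc
    have hc' : pvDq (pvFilterLines (PySem.Chars.splitlines script.toList)) = true := by
      revert hc; cases pvDq (pvFilterLines (PySem.Chars.splitlines script.toList)) <;> simp
    exact hD (pvD_of_dq script hc')
  show trim_script_py script = trim_script_py_alt script
  unfold trim_script_py trim_script_py_alt
  simp only [pvLoopA_eq, pvCode_eq, pvCollapse_eq]
  have hmain := (pvMain (pvFilterLines (PySem.Chars.splitlines script.toList)).length
      (pvFilterLines (PySem.Chars.splitlines script.toList)) le_rfl).2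
      hDq
  rw [pvStrip_join_H_false_true,
      pvStrip_join_coreB (pvG true (pvFilterLines (PySem.Chars.splitlines script.toList))),
      pvStrip_join_coreB (pvH true (pvFilterLines (PySem.Chars.splitlines script.toList))), hmain]

theorem trim_script_py_changed : Claim_changed_trim_script_py := by
  unfold Claim_changed_trim_script_py; decide

theorem trim_script_py_tight : Claim_exact_trim_script_py := by
  intro s _ hD heq
  have hdq := pvDq_of_D s hD
  have hstrict : pvWc (pvG true (pvFilterLines (PySem.Chars.splitlines s.toList))) ≥
      pvWc (pvH true (pvFilterLines (PySem.Chars.splitlines s.toList))) + 1 :=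
    (pvCnt (pvFilterLines (PySem.Chars.splitlines s.toList)).length _ le_rfl).2.2.2.2.1 hdq
  -- the assumed output equality forces the stripped joins to agree
  have heq' : PySem.Chars.strip (PySem.Chars.join ['\n']
        (pvG true (pvFilterLines (PySem.Chars.splitlines s.toList)))) =
      PySem.Chars.strip (PySem.Chars.join ['\n']
        (pvH true (pvFilterLines (PySem.Chars.splitlines s.toList)))) := by
    have h1 : trim_script_py s = String.ofList (PySem.Chars.strip (PySem.Chars.join ['\n']
        (pvG true (pvFilterLines (PySem.Chars.splitlines s.toList)))) ++ ['\n']) := by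
      unfold trim_script_py
      simp only [pvLoopA_eq]
    have h2 : trim_script_py_alt s = String.ofList (PySem.Chars.strip (PySem.Chars.join ['\n']
        (pvH true (pvFilterLines (PySem.Chars.splitlines s.toList)))) ++ ['\n']) := by
      unfold trim_script_py_alt
      simp only [pvCode_eq, pvCollapse_eq, pvStrip_join_H_false_true]
    rw [h1, h2] at heq
    have h3 := congrArg String.toList heq
    rw [String.toList_ofList, String.toList_ofList] at h3
    exact List.append_cancel_right h3
  -- the filtered script contains a code line
  have hnbF : ∃ z ∈ pvFilterLines (PySem.Chars.splitlines s.toList), pvBlank z = false := by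
    obtain ⟨i, hi, h1i, hprev, hw⟩ := (pvDq_iff _).1 hdq
    refine ⟨(pvFilterLines (PySem.Chars.splitlines s.toList)).getD (i - 1) [], ?_, hprev⟩
    rw [List.getD_eq_getElem _ _ (by omega)]
    exact List.getElem_mem _
  have hnlF : ∀ l ∈ pvFilterLines (PySem.Chars.splitlines s.toList), ('\n' : Char) ∉ l :=
    fun l hl => pvLines_no_newline s.toList l
      (pvFilterLines_subset (PySem.Chars.splitlines s.toList) l hl)
  -- newline counts pin the number of kept core lines on each side
  have hcG := pvOut_count (pvG true (pvFilterLines (PySem.Chars.splitlines s.toList)))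
    (pvG_has_nonblank _ true hnbF) (pvHead_nonblank_G _)
    (fun l hl => hnlF l (pvG_subset true _ l hl))
  have hcH := pvOut_count (pvH true (pvFilterLines (PySem.Chars.splitlines s.toList)))
    (pvH_has_nonblank _ true hnbF) (pvHead_nonblank_H _)
    (fun l hl => hnlF l (pvH_subset true _ l hl))
  rw [heq'] at hcG
  unfold pvWc at hstrict
  omega
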